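-- pv_equiv track=rewrite | github.com/shabeeliqbal/advent-of-code-2025 | day 12/day 12 p1.py | is_space_sufficient
-- ===== SOURCE A (Python) =====
-- def is_space_sufficient(grid, width, height, required_area, min_item_area, slack=20):
--     used = sum(bin(r).count("1") for r in grid)
--     free = width * height - used
--     if free < required_area:
--         return False
--     if free > required_area + slack:
--         return True
--     occupied = set()
--     for r in range(height):
--         for c in range(width):
--             if (grid[r] >> (width - 1 - c)) & 1:
--                 occupied.add((r, c))
--     visited = set()
--     usable = 0
--     for r in range(height):
--         for c in range(width):
--             if (r, c) in occupied or (r, c) in visited: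
--                 continue
--             stack = [(r, c)]
--             visited.add((r, c))
--             size = 0
--             while stack:
--                 x, y = stack.pop()
--                 size += 1
--                 for nx, ny in ((x+1,y),(x-1,y),(x,y+1),(x,y-1)):
--                     if 0 <= nx < height and 0 <= ny < width:
--                         if (nx, ny) not in occupied and (nx, ny) not in visited:
--                             visited.add((nx, ny))
--                             stack.append((nx, ny))
--             if size >= min_item_area:
--                 usable += size
--             if usable >= required_area:
--                 return True
--     return usable >= required_area
-- ===== SOURCE B (Python) =====
-- def is_space_sufficient(grid, width, height, required_area, min_item_area, slack=20):
--     free = width * height - sum(bin(r).count("1") for r in grid)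
--     if free < required_area:
--         return False
--     if free > required_area + slack:
--         return True
--     # single row-major pass: merge-label connected free regions using only the
--     # already-seen left and up neighbours (no per-seed flood fill, no stack)
--     label = {}      # free cell -> region label
--     members = {}    # region label -> list of its cells
--     fresh = 0
--     for r in range(height):
--         for c in range(width):
--             if (grid[r] >> (width - 1 - c)) & 1:
--                 continue
--             up = label.get((r - 1, c))
--             left = label.get((r, c - 1))
--             if up is None and left is None:
--                 lab = fresh
--                 fresh += 1
--                 members[lab] = []
--             elif up is None or left is None or up == left:
--                 lab = up if up is not None else left
--             else:
--                 lab = up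
--                 for cell in members[left]:
--                     label[cell] = lab
--                 members[lab].extend(members[left])
--                 del members[left]
--             label[(r, c)] = lab
--             members[lab].append((r, c))
--     usable = sum(len(cells) for cells in members.values() if len(cells) >= min_item_area)
--     return usable >= required_area
-- ===== Notes on version B (the rewrite author's own statement) =====
-- stated objective: alternative
-- what changed: The two early exits are kept; the per-seed DFS flood fill with an explicit stack over set-of-tuples visited/occupied is replaced by a single row-major merge-labeling pass that joins each free cell with its already-seen left and up neighbours' regions (relabel-on-merge partition), then sums the sizes of regions meeting min_item_area.
import Mathlib
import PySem

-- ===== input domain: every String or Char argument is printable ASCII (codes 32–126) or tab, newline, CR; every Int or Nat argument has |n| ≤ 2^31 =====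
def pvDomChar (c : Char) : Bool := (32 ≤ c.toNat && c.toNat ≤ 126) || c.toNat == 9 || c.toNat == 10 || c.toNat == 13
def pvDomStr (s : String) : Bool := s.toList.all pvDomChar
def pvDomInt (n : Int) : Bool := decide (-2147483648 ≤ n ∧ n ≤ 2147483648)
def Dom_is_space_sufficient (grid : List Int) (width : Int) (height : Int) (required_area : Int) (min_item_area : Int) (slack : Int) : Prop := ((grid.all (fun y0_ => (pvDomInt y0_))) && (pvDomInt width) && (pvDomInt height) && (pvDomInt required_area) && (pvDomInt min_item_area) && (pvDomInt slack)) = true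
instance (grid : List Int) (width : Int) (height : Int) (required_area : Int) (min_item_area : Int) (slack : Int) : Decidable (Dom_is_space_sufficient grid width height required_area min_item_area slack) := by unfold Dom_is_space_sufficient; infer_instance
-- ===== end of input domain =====

-- B replaces A's per-seed stack DFS flood fill by a single row-major merge-labeling pass
-- (join each free cell with its left/up neighbours' regions); alternative algorithm, not claimed faster.

-- helpers shared by both ports (phase 1 of A is kept unchanged in B)
def pvUsed (grid : List Int) : Int :=
  grid.foldl (fun acc r => acc + (PySem.Int.bitCount r : Int)) 0

-- (grid[r] >> (width-1-c)) & 1 ; the index is in range under Pre_, pyGetD's default is never read there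
def pvBitSet (grid : List Int) (width : Int) (p : Int × Int) : Bool :=
  PySem.Int.mod ((PySem.List.pyGetD grid p.1 0) >>> (width - 1 - p.2).toNat) 2 == 1

-- the nested 'for r in range(height): for c in range(width):' iteration sequence
def pvCells (height width : Int) : List (Int × Int) :=
  (PySem.List.pyRange 0 height 1).flatMap
    (fun r => (PySem.List.pyRange 0 width 1).map (fun c => (r, c)))

-- ===== PORT A =====
def pvOccupied (grid : List Int) (width height : Int) : PySem.Set (Int × Int) :=
  (pvCells height width).foldl
    (fun occ p => if pvBitSet grid width p then PySem.Set.add occ p else occ)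
    PySem.Set.empty

def pvNbrs (x y : Int) : List (Int × Int) := [(x+1,y), (x-1,y), (x,y+1), (x,y-1)]

-- the 'while stack:' loop; stack is kept reversed (head = Python's list end / pop side);
-- fuel only makes the recursion structural, the caller passes enough for the loop to finish
def pvDfs (occ : PySem.Set (Int × Int)) (height width : Int) :
    Nat → List (Int × Int) → PySem.Set (Int × Int) → Int →
    PySem.Set (Int × Int) × Int
  | 0, _, visited, size => (visited, size)
  | _ + 1, [], visited, size => (visited, size)
  | fuel + 1, (x, y) :: rest, visited, size =>
      let st := (pvNbrs x y).foldl
        (fun (vs : PySem.Set (Int × Int) × List (Int × Int)) n =>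
          if 0 ≤ n.1 ∧ n.1 < height ∧ 0 ≤ n.2 ∧ n.2 < width then
            if ¬ (PySem.Set.contains occ n = true) ∧ ¬ (PySem.Set.contains vs.1 n = true) then
              (PySem.Set.add vs.1 n, n :: vs.2)
            else vs
          else vs)
        (visited, rest)
      pvDfs occ height width fuel st.2 st.1 (size + 1)

def pvLoopA (height width required_area min_item_area : Int) (occ : PySem.Set (Int × Int)) :
    List (Int × Int) → PySem.Set (Int × Int) → Int → Bool
  | [], _, usable => decide (required_area ≤ usable)
  | p :: rest, visited, usable =>
      if PySem.Set.contains occ p || PySem.Set.contains visited p then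
        pvLoopA height width required_area min_item_area occ rest visited usable
      else
        let r := pvDfs occ height width ((width * height).toNat + 1)
                   [p] (PySem.Set.add visited p) 0
        let usable' := if min_item_area ≤ r.2 then usable + r.2 else usable
        if required_area ≤ usable' then true
        else pvLoopA height width required_area min_item_area occ rest r.1 usable'

def is_space_sufficient (grid : List Int) (width : Int) (height : Int) (required_area : Int) (min_item_area : Int) (slack : Int) : Bool :=
  let used := pvUsed grid
  let free := width * height - used
  if free < required_area then false
  else if required_area + slack < free then true
  else
    let occ := pvOccupied grid width height
    pvLoopA height width required_area min_item_area occ (pvCells height width) PySem.Set.empty 0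

-- ===== PORT B =====
-- one row-major pass; state: label : cell -> region label, members : label -> cells, fresh label counter
def pvLoopB (grid : List Int) (width : Int) :
    List (Int × Int) → PySem.Dict (Int × Int) Int → PySem.Dict Int (List (Int × Int)) → Int →
    PySem.Dict (Int × Int) Int × PySem.Dict Int (List (Int × Int)) × Int
  | [], label, members, fresh => (label, members, fresh)
  | p :: rest, label, members, fresh =>
      if pvBitSet grid width p then pvLoopB grid width rest label members fresh
      else
        let up := label.get? (p.1 - 1, p.2)
        let left := label.get? (p.1, p.2 - 1)
        let s : Int × PySem.Dict (Int × Int) Int × PySem.Dict Int (List (Int × Int)) × Int :=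
          match up, left with
          | none, none => (fresh, label, members.insert fresh [], fresh + 1)
          | some u, none => (u, label, members, fresh)
          | none, some l => (l, label, members, fresh)
          | some u, some l =>
              if u == l then (u, label, members, fresh)
              else
                let small := members.getD l []
                (u, small.foldl (fun d cell => d.insert cell u) label,
                 (members.insert u (members.getD u [] ++ small)).erase l, fresh)
        match s with
        | (lab, label1, members1, fresh1) =>
            pvLoopB grid width rest (label1.insert p lab)
              (members1.insert lab (members1.getD lab [] ++ [p])) fresh1

def is_space_sufficient_alt (grid : List Int) (width : Int) (height : Int) (required_area : Int) (min_item_area : Int) (slack : Int) : Bool :=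
  let free := width * height - pvUsed grid
  if free < required_area then false
  else if required_area + slack < free then true
  else
    let st := pvLoopB grid width (pvCells height width) PySem.Dict.empty PySem.Dict.empty 0
    let usable := st.2.1.values.foldl
      (fun acc cells => if min_item_area ≤ (cells.length : Int) then acc + (cells.length : Int) else acc) 0
    decide (required_area ≤ usable)

-- ===== PRECONDITION & SPEC =====
-- Pre_ excludes exactly the inputs on which A raises IndexError: the slack window forces the
-- grid scan (required_area ≤ width*height-used ≤ required_area+slack) while grid has fewer than
-- height rows; B raises there as well.
def Pre_is_space_sufficient (grid : List Int) (width : Int) (height : Int) (required_area : Int) (min_item_area : Int) (slack : Int) : Prop :=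
  width * height - pvUsed grid < required_area ∨
  required_area + slack < width * height - pvUsed grid ∨
  height ≤ (grid.length : Int)
instance (grid : List Int) (width : Int) (height : Int) (required_area : Int) (min_item_area : Int) (slack : Int) : Decidable (Pre_is_space_sufficient grid width height required_area min_item_area slack) := by unfold Pre_is_space_sufficient; infer_instance

def pvWitness_is_space_sufficient : List Int × Int × Int × Int × Int × Int := ([1, 0], 2, 2, 2, 1, 1)

def Spec_is_space_sufficient (grid : List Int) (width : Int) (height : Int) (required_area : Int) (min_item_area : Int) (slack : Int) (out : Bool) : Prop := out = is_space_sufficient_alt grid width height required_area min_item_area slack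
instance (grid : List Int) (width : Int) (height : Int) (required_area : Int) (min_item_area : Int) (slack : Int) (out : Bool) : Decidable (Spec_is_space_sufficient grid width height required_area min_item_area slack out) := by unfold Spec_is_space_sufficient; infer_instance

-- ===== CLAIM (what is proved, stated in full; the proofs are below) =====
def Claim_equal_is_space_sufficient : Prop := ∀ (grid : List Int) (width : Int) (height : Int) (required_area : Int) (min_item_area : Int) (slack : Int), Dom_is_space_sufficient grid width height required_area min_item_area slack → Pre_is_space_sufficient grid width height required_area min_item_area slack → Spec_is_space_sufficient grid width height required_area min_item_area slack (is_space_sufficient grid width height required_area min_item_area slack)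

-- ===== LEMMAS AND PROOFS =====

-- ---- grid geometry ----
def pvInBox (width height : Int) (p : Int × Int) : Prop :=
  0 ≤ p.1 ∧ p.1 < height ∧ 0 ≤ p.2 ∧ p.2 < width

lemma mem_pvCells {height width : Int} {p : Int × Int} :
    p ∈ pvCells height width ↔ pvInBox width height p := by
  cases p with
  | mk r c =>
    simp only [pvCells, List.mem_flatMap, List.mem_map, pvInBox]
    constructor
    · rintro ⟨r', hr', c', hc', h⟩
      obtain ⟨h1, h2⟩ := Prod.mk.injEq .. ▸ h
      rw [PySem.List.mem_pyRange_one] at hr' hc'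
      cases h; omega
    · rintro ⟨h1, h2, h3, h4⟩
      exact ⟨r, by rw [PySem.List.mem_pyRange_one]; omega, c,
        by rw [PySem.List.mem_pyRange_one]; omega, rfl⟩

def pvLex (p q : Int × Int) : Prop := p.1 < q.1 ∨ (p.1 = q.1 ∧ p.2 < q.2)

lemma pairwise_pvLex_pvCells (height width : Int) :
    (pvCells height width).Pairwise pvLex := by
  unfold pvCells
  apply List.pairwise_flatMap.2
  constructor
  · intro r _
    apply List.Pairwise.map
    · intro c c' h; exact Or.inr ⟨rfl, h⟩
    · exact PySem.List.pairwise_lt_pyRange_one 0 width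
  · apply List.Pairwise.imp ?_ (PySem.List.pairwise_lt_pyRange_one 0 height)
    intro r r' h p hp q hq
    simp only [List.mem_map] at hp hq
    obtain ⟨c, _, rfl⟩ := hp; obtain ⟨c', _, rfl⟩ := hq
    exact Or.inl h

-- ---- adjacency and connectivity ----
def pvAdj (p q : Int × Int) : Prop :=
  (p.1 = q.1 ∧ (p.2 = q.2 + 1 ∨ q.2 = p.2 + 1)) ∨
  (p.2 = q.2 ∧ (p.1 = q.1 + 1 ∨ q.1 = p.1 + 1))

lemma pvAdj.symm {p q : Int × Int} (h : pvAdj p q) : pvAdj q p := by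
  unfold pvAdj at *; omega

lemma pvAdj.irrefl (p : Int × Int) : ¬ pvAdj p p := by unfold pvAdj; omega

def pvStep (S : Finset (Int × Int)) (p q : Int × Int) : Prop :=
  p ∈ S ∧ q ∈ S ∧ pvAdj p q

def pvConn (S : Finset (Int × Int)) (p q : Int × Int) : Prop :=
  Relation.ReflTransGen (pvStep S) p q

lemma pvConn.symm {S : Finset (Int × Int)} {p q : Int × Int} (h : pvConn S p q) :
    pvConn S q p :=
  Relation.ReflTransGen.symmetric (fun _ _ hs => ⟨hs.2.1, hs.1, hs.2.2.symm⟩) h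

lemma pvConn.trans {S : Finset (Int × Int)} {p q r : Int × Int}
    (h1 : pvConn S p q) (h2 : pvConn S q r) : pvConn S p r :=
  Relation.ReflTransGen.trans h1 h2

lemma pvConn.mono {S T : Finset (Int × Int)} (hST : S ⊆ T) {p q : Int × Int}
    (h : pvConn S p q) : pvConn T p q :=
  Relation.ReflTransGen.mono (fun _ _ hs => ⟨hST hs.1, hST hs.2.1, hs.2.2⟩) h

noncomputable def pvComp (S : Finset (Int × Int)) (a : Int × Int) : Finset (Int × Int) :=
  @Finset.filter _ (fun b => pvConn S a b) (Classical.decPred _) S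

lemma mem_pvComp {S : Finset (Int × Int)} {a b : Int × Int} :
    b ∈ pvComp S a ↔ b ∈ S ∧ pvConn S a b := by
  unfold pvComp; exact @Finset.mem_filter _ _ (Classical.decPred _) _ _

lemma pvComp_subset {S : Finset (Int × Int)} {a : Int × Int} : pvComp S a ⊆ S :=
  fun _ h => (mem_pvComp.1 h).1

lemma self_mem_pvComp {S : Finset (Int × Int)} {a : Int × Int} (ha : a ∈ S) :
    a ∈ pvComp S a := mem_pvComp.2 ⟨ha, Relation.ReflTransGen.refl⟩

lemma pvComp_eq_of_conn {S : Finset (Int × Int)} {a b : Int × Int}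
    (h : pvConn S a b) : pvComp S a = pvComp S b := by
  ext x
  simp only [mem_pvComp]
  exact ⟨fun ⟨hx, hc⟩ => ⟨hx, h.symm.trans hc⟩, fun ⟨hx, hc⟩ => ⟨hx, h.trans hc⟩⟩

def pvClosed (S V : Finset (Int × Int)) : Prop :=
  ∀ x ∈ V, ∀ y, pvStep S x y → y ∈ V

lemma pvClosed_conn {S V : Finset (Int × Int)} (hV : pvClosed S V) {x y : Int × Int}
    (hx : x ∈ V) (h : pvConn S x y) : y ∈ V := by
  induction h with
  | refl => exact hx
  | tail _ hs ih => exact hV _ ih _ hs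

lemma pvComp_closed {S : Finset (Int × Int)} (a : Int × Int) :
    pvClosed S (pvComp S a) := by
  intro x hx y hs
  rcases mem_pvComp.1 hx with ⟨_, hc⟩
  exact mem_pvComp.2 ⟨hs.2.1, hc.tail hs⟩

lemma pvClosed_union {S V W : Finset (Int × Int)} (hV : pvClosed S V)
    (hW : pvClosed S W) : pvClosed S (V ∪ W) := by
  intro x hx y hs
  rcases Finset.mem_union.1 hx with h | h
  · exact Finset.mem_union_left _ (hV _ h _ hs)
  · exact Finset.mem_union_right _ (hW _ h _ hs)

lemma pvClosed_disjoint_comp {S V : Finset (Int × Int)} (hV : pvClosed S V)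
    {s : Int × Int} (hs : s ∉ V) : ∀ y ∈ V, y ∉ pvComp S s := by
  intro y hy hyc
  exact hs (pvClosed_conn hV hy (mem_pvComp.1 hyc).2.symm)

-- ---- counting: cells lying in components of size ≥ m ----
noncomputable def pvCount (S V : Finset (Int × Int)) (m : Int) : Nat :=
  (V.filter (fun a => m ≤ ((pvComp S a).card : Int))).card

lemma pvCount_mono {S V V' : Finset (Int × Int)} (h : V ⊆ V') (m : Int) :
    pvCount S V m ≤ pvCount S V' m := by
  unfold pvCount; exact Finset.card_le_card (Finset.filter_subset_filter _ h)

lemma pvCount_union_comp {S V : Finset (Int × Int)} {s : Int × Int} (m : Int)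
    (hdis : ∀ y ∈ V, y ∉ pvComp S s) (hsS : s ∈ S) :
    (pvCount S (V ∪ pvComp S s) m : Int) =
      (pvCount S V m : Int) +
        (if m ≤ ((pvComp S s).card : Int) then ((pvComp S s).card : Int) else 0) := by
  unfold pvCount
  rw [Finset.filter_union, Finset.card_union_of_disjoint]
  · push_cast
    congr 1
    by_cases hm : m ≤ ((pvComp S s).card : Int)
    · rw [if_pos hm, Finset.filter_true_of_mem]
      intro a ha
      rwa [pvComp_eq_of_conn (mem_pvComp.1 ha).2.symm]
    · rw [if_neg hm, Finset.filter_false_of_mem, Finset.card_empty, Nat.cast_zero]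
      intro a ha
      rwa [pvComp_eq_of_conn (mem_pvComp.1 ha).2.symm]
  · rw [Finset.disjoint_left]
    intro a ha ha'
    exact hdis a (Finset.mem_of_mem_filter _ ha) (Finset.mem_of_mem_filter _ ha')

-- ---- adding one vertex to the graph: how connectivity changes ----
lemma pvConn_insert_master {S : Finset (Int × Int)} {v a b : Int × Int}
    (hv : v ∉ S) (ha : a ∈ S) (h : pvConn (insert v S) a b) :
    (b = v → ∃ n ∈ S, pvAdj v n ∧ pvConn S a n) ∧
    (b ∈ S → (pvConn S a b ∨
      ∃ n1 n2, n1 ∈ S ∧ n2 ∈ S ∧ pvAdj v n1 ∧ pvAdj v n2 ∧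
        pvConn S a n1 ∧ pvConn S n2 b)) := by
  induction h with
  | refl =>
      refine ⟨fun hbv => absurd (hbv ▸ ha) hv, fun _ => Or.inl Relation.ReflTransGen.refl⟩
  | @tail x b hax hs ih =>
      obtain ⟨hxv, hxS, hadj⟩ : (x = v ∨ x ∈ S) ∧ (b = v ∨ b ∈ S) ∧ pvAdj x b := by
        refine ⟨Finset.mem_insert.1 hs.1, Finset.mem_insert.1 hs.2.1, hs.2.2⟩
      constructor
      · rintro rfl
        rcases hxv with rfl | hxS'
        · exact absurd hadj (pvAdj.irrefl _)
        · rcases ih.2 hxS' with hc | ⟨n1, n2, hn1, hn2, ha1, ha2, hc1, hc2⟩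
          · exact ⟨x, hxS', hadj.symm, hc⟩
          · exact ⟨n1, hn1, ha1, hc1⟩
      · intro hbS
        rcases hxv with rfl | hxS'
        · rcases ih.1 rfl with ⟨n, hn, hvn, hcn⟩
          exact Or.inr ⟨n, b, hn, hbS, hvn, hadj, hcn, Relation.ReflTransGen.refl⟩
        · rcases ih.2 hxS' with hc | ⟨n1, n2, hn1, hn2, ha1, ha2, hc1, hc2⟩
          · exact Or.inl (hc.tail ⟨hxS', hbS, hadj⟩)
          · exact Or.inr ⟨n1, n2, hn1, hn2, ha1, ha2, hc1, hc2.tail ⟨hxS', hbS, hadj⟩⟩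

lemma pvConn_insert_v_iff {S : Finset (Int × Int)} {v b : Int × Int}
    (hv : v ∉ S) (hb : b ∈ S) :
    pvConn (insert v S) v b ↔ ∃ n ∈ S, pvAdj v n ∧ pvConn S n b := by
  constructor
  · intro h
    rcases (pvConn_insert_master hv hb h.symm).1 rfl with ⟨n, hn, hvn, hcn⟩
    exact ⟨n, hn, hvn, hcn.symm⟩
  · rintro ⟨n, hn, hvn, hcn⟩
    exact Relation.ReflTransGen.head
      ⟨Finset.mem_insert_self _ _, Finset.mem_insert_of_mem hn, hvn⟩
      (hcn.mono (Finset.subset_insert _ _))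

lemma pvConn_insert_ab_iff {S : Finset (Int × Int)} {v a b : Int × Int}
    (hv : v ∉ S) (ha : a ∈ S) (hb : b ∈ S) :
    pvConn (insert v S) a b ↔ (pvConn S a b ∨
      ∃ n1 n2, n1 ∈ S ∧ n2 ∈ S ∧ pvAdj v n1 ∧ pvAdj v n2 ∧
        pvConn S a n1 ∧ pvConn S n2 b) := by
  constructor
  · intro h; exact (pvConn_insert_master hv ha h).2 hb
  · rintro (hc | ⟨n1, n2, hn1, hn2, ha1, ha2, hc1, hc2⟩)
    · exact hc.mono (Finset.subset_insert _ _)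
    · refine ((hc1.mono (Finset.subset_insert _ _)).tail
        ⟨Finset.mem_insert_of_mem hn1, Finset.mem_insert_self _ _, ha1.symm⟩).trans ?_
      exact Relation.ReflTransGen.head
        ⟨Finset.mem_insert_self _ _, Finset.mem_insert_of_mem hn2, ha2⟩
        (hc2.mono (Finset.subset_insert _ _))

-- ---- the free set and the occupied PySem.Set ----
def pvFreeOf (grid : List Int) (width : Int) (l : List (Int × Int)) : Finset (Int × Int) :=
  (l.filter (fun p => !pvBitSet grid width p)).toFinset

def pvFreeSet (grid : List Int) (width height : Int) : Finset (Int × Int) :=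
  pvFreeOf grid width (pvCells height width)

lemma mem_pvFreeSet {grid : List Int} {width height : Int} {q : Int × Int} :
    q ∈ pvFreeSet grid width height ↔
      pvInBox width height q ∧ pvBitSet grid width q = false := by
  simp [pvFreeSet, pvFreeOf, mem_pvCells]

lemma pvSet_contains_iff {s : PySem.Set (Int × Int)} {q : Int × Int} :
    PySem.Set.contains s q = true ↔ q ∈ s := by
  simp [PySem.Set.contains]

lemma mem_foldl_add_filter (f : (Int × Int) → Bool) :
    ∀ (l : List (Int × Int)) (s : PySem.Set (Int × Int)) (q : Int × Int),
      q ∈ l.foldl (fun occ p => if f p then PySem.Set.add occ p else occ) s ↔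
        q ∈ s ∨ (q ∈ l ∧ f q = true) := by
  intro l
  induction l with
  | nil => simp
  | cons a tl ih =>
      intro s q
      simp only [List.foldl_cons, List.mem_cons]
      by_cases hfa : f a = true
      · rw [if_pos hfa, ih]
        rw [PySem.Set.mem_add]
        constructor
        · rintro ((h | rfl) | h)
          · exact Or.inl h
          · exact Or.inr ⟨Or.inl rfl, hfa⟩
          · exact Or.inr ⟨Or.inr h.1, h.2⟩
        · rintro (h | ⟨(rfl | h), hq⟩)
          · exact Or.inl (Or.inl h)
          · exact Or.inl (Or.inr rfl)
          · exact Or.inr ⟨h, hq⟩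
      · rw [if_neg hfa, ih]
        constructor
        · rintro (h | h)
          · exact Or.inl h
          · exact Or.inr ⟨Or.inr h.1, h.2⟩
        · rintro (h | ⟨(rfl | h), hq⟩)
          · exact Or.inl h
          · exact absurd hq hfa
          · exact Or.inr ⟨h, hq⟩

lemma contains_pvOccupied {grid : List Int} {width height : Int} {q : Int × Int} :
    PySem.Set.contains (pvOccupied grid width height) q = true ↔
      pvInBox width height q ∧ pvBitSet grid width q = true := by
  rw [pvSet_contains_iff]
  unfold pvOccupied
  rw [mem_foldl_add_filter]
  simp [PySem.Set.empty, mem_pvCells]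

lemma free_iff_accept {grid : List Int} {width height : Int} {q : Int × Int} :
    q ∈ pvFreeSet grid width height ↔
      (pvInBox width height q ∧
        ¬ (PySem.Set.contains (pvOccupied grid width height) q = true)) := by
  rw [mem_pvFreeSet, contains_pvOccupied]
  constructor
  · rintro ⟨hb, hbit⟩
    exact ⟨hb, fun h => by rw [h.2] at hbit; cases hbit⟩
  · rintro ⟨hb, h⟩
    refine ⟨hb, ?_⟩
    cases hbit : pvBitSet grid width q
    · rfl
    · exact absurd ⟨hb, hbit⟩ h

-- ---- the neighbour scan inside the DFS loop ----
lemma mem_pvNbrs {x y : Int} {q : Int × Int} : q ∈ pvNbrs x y ↔ pvAdj (x, y) q := by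
  cases q with
  | mk a b => simp [pvNbrs, pvAdj, Prod.ext_iff]; omega

lemma nodup_pvNbrs (x y : Int) : (pvNbrs x y).Nodup := by
  simp [pvNbrs, Prod.ext_iff]; omega

lemma nbr_fold_spec {height width : Int} {occ : PySem.Set (Int × Int)} :
    ∀ (ns : List (Int × Int)) (vis : PySem.Set (Int × Int)) (st : List (Int × Int)),
      ns.Nodup →
      (ns.foldl
        (fun (vs : PySem.Set (Int × Int) × List (Int × Int)) n =>
          if 0 ≤ n.1 ∧ n.1 < height ∧ 0 ≤ n.2 ∧ n.2 < width then
            if ¬ (PySem.Set.contains occ n = true) ∧ ¬ (PySem.Set.contains vs.1 n = true) then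
              (PySem.Set.add vs.1 n, n :: vs.2)
            else vs
          else vs)
        (vis, st)) =
      (vis ++ ns.filter
          (fun n => decide ((0 ≤ n.1 ∧ n.1 < height ∧ 0 ≤ n.2 ∧ n.2 < width) ∧ n ∉ occ ∧ n ∉ vis)),
       (ns.filter
          (fun n => decide ((0 ≤ n.1 ∧ n.1 < height ∧ 0 ≤ n.2 ∧ n.2 < width) ∧ n ∉ occ ∧ n ∉ vis))).reverse ++ st) := by
  intro ns
  induction ns with
  | nil => simp
  | cons n tl ih =>
      intro vis st hnd
      rcases List.nodup_cons.1 hnd with ⟨hn, hnd'⟩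
      simp only [List.foldl_cons, List.filter_cons]
      by_cases hbox : 0 ≤ n.1 ∧ n.1 < height ∧ 0 ≤ n.2 ∧ n.2 < width
      · rw [if_pos hbox]
        by_cases hok : ¬ (PySem.Set.contains occ n = true) ∧ ¬ (PySem.Set.contains vis n = true)
        · rw [if_pos hok]
          have hocc' : n ∉ occ := fun h => hok.1 (pvSet_contains_iff.2 h)
          have hvis' : n ∉ vis := fun h => hok.2 (pvSet_contains_iff.2 h)
          have hadd : PySem.Set.add vis n = vis ++ [n] := by
            unfold PySem.Set.add; rw [if_neg hok.2]
          have hpn : (decide ((0 ≤ n.1 ∧ n.1 < height ∧ 0 ≤ n.2 ∧ n.2 < width) ∧ n ∉ occ ∧ n ∉ vis)) = true := by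
            simp only [decide_eq_true_iff]; exact ⟨hbox, hocc', hvis'⟩
          rw [hpn]
          rw [ih _ _ hnd']
          have hfilter :
              tl.filter (fun q => decide ((0 ≤ q.1 ∧ q.1 < height ∧ 0 ≤ q.2 ∧ q.2 < width) ∧ q ∉ occ ∧ q ∉ PySem.Set.add vis n)) =
              tl.filter (fun q => decide ((0 ≤ q.1 ∧ q.1 < height ∧ 0 ≤ q.2 ∧ q.2 < width) ∧ q ∉ occ ∧ q ∉ vis)) := by
            apply List.filter_congr
            intro q hq
            have hqn : q ≠ n := fun h => hn (h ▸ hq)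
            simp only [decide_eq_decide, hadd]
            constructor
            · rintro ⟨h1, h2, h3⟩
              exact ⟨h1, h2, fun hin => h3 (List.mem_append_left _ hin)⟩
            · rintro ⟨h1, h2, h3⟩
              refine ⟨h1, h2, fun hin => ?_⟩
              rcases List.mem_append.1 hin with h | h
              · exact h3 h
              · exact hqn (List.mem_singleton.1 h)
          rw [hadd] at hfilter ⊢
          rw [hfilter]
          simp [List.append_assoc]
        · rw [if_neg hok]
          rw [ih _ _ hnd']
          have hpn : (decide ((0 ≤ n.1 ∧ n.1 < height ∧ 0 ≤ n.2 ∧ n.2 < width) ∧ n ∉ occ ∧ n ∉ vis)) = false := by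
            simp only [decide_eq_false_iff_not]
            rintro ⟨_, h2, h3⟩
            rcases Decidable.not_and_iff_or_not.1 hok with h | h
            · exact h2 (pvSet_contains_iff.1 (Decidable.not_not.1 h))
            · exact h3 (pvSet_contains_iff.1 (Decidable.not_not.1 h))
          rw [hpn]
          simp
      · rw [if_neg hbox]
        rw [ih _ _ hnd']
        have hpn : (decide ((0 ≤ n.1 ∧ n.1 < height ∧ 0 ≤ n.2 ∧ n.2 < width) ∧ n ∉ occ ∧ n ∉ vis)) = false := by
          simp only [decide_eq_false_iff_not]
          rintro ⟨h1, _⟩; exact hbox h1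
        rw [hpn]
        simp

-- ---- DFS correctness ----
lemma pvW_eq_comp {S : Finset (Int × Int)} {s : Int × Int} {V W : Finset (Int × Int)}
    (hsW : s ∈ W) (hWc : W ⊆ pvComp S s)
    (hdisV : ∀ y ∈ V, y ∉ pvComp S s)
    (hsat : ∀ x ∈ W, ∀ y, pvStep S x y → y ∈ V ∪ W) : W = pvComp S s := by
  have key : ∀ b, pvConn S s b → b ∈ W := by
    intro b h
    induction h with
    | refl => exact hsW
    | @tail x y hax hs ih =>
        rcases Finset.mem_union.1 (hsat x ih y hs) with h | h
        · exact absurd (mem_pvComp.2 ⟨hs.2.1, Relation.ReflTransGen.tail hax hs⟩)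
            (hdisV _ h)
        · exact h
  exact Finset.Subset.antisymm hWc (fun b hb => key b (mem_pvComp.1 hb).2)

lemma pvDfs_spec {grid : List Int} {width height : Int} {s : Int × Int} :
    ∀ (fuel : Nat) (stack : List (Int × Int)) (visited : PySem.Set (Int × Int))
      (size : Int) (V W : Finset (Int × Int)),
      visited.toFinset = V ∪ W →
      (∀ y ∈ V, y ∉ pvComp (pvFreeSet grid width height) s) →
      (∀ x ∈ stack, x ∈ W) →
      stack.Nodup →
      W ⊆ pvComp (pvFreeSet grid width height) s →
      s ∈ W →
      (∀ x ∈ W, x ∉ stack → ∀ y, pvStep (pvFreeSet grid width height) x y → y ∈ V ∪ W) →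
      size = (W.card : Int) - stack.length →
      (pvComp (pvFreeSet grid width height) s).card - W.card + stack.length ≤ fuel →
      ((pvDfs (pvOccupied grid width height) height width fuel stack visited size).1.toFinset
          = V ∪ pvComp (pvFreeSet grid width height) s ∧
        (pvDfs (pvOccupied grid width height) height width fuel stack visited size).2
          = ((pvComp (pvFreeSet grid width height) s).card : Int)) := by
  intro fuel
  induction fuel with
  | zero =>
      intro stack visited size V W hvis hdisV hstack hnd hWc hsW hsat hsize hfuel
      have hlen : stack.length = 0 := by
        have := Finset.card_le_card hWc
        omega
      have hstack0 : stack = [] := List.length_eq_zero_iff.1 hlen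
      subst hstack0
      have hWeq : W = pvComp (pvFreeSet grid width height) s :=
        pvW_eq_comp hsW hWc hdisV (fun x hx y hs => hsat x hx (by simp) y hs)
      refine ⟨?_, ?_⟩
      · show visited.toFinset = _
        rw [hvis, hWeq]
      · show size = _
        rw [hsize, hWeq]; simp
  | succ fuel ih =>
      intro stack visited size V W hvis hdisV hstack hnd hWc hsW hsat hsize hfuel
      match stack with
      | [] =>
          have hWeq : W = pvComp (pvFreeSet grid width height) s :=
            pvW_eq_comp hsW hWc hdisV (fun x hx y hs => hsat x hx (by simp) y hs)
          refine ⟨?_, ?_⟩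
          · show visited.toFinset = _
            rw [hvis, hWeq]
          · show size = _
            rw [hsize, hWeq]; simp
      | (x, y) :: rest =>
          have heq : pvDfs (pvOccupied grid width height) height width (fuel + 1)
              ((x, y) :: rest) visited size =
              pvDfs (pvOccupied grid width height) height width fuel
                ((pvNbrs x y).foldl
                  (fun (vs : PySem.Set (Int × Int) × List (Int × Int)) n =>
                    if 0 ≤ n.1 ∧ n.1 < height ∧ 0 ≤ n.2 ∧ n.2 < width then
                      if ¬ (PySem.Set.contains (pvOccupied grid width height) n = true) ∧
                          ¬ (PySem.Set.contains vs.1 n = true) then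
                        (PySem.Set.add vs.1 n, n :: vs.2)
                      else vs
                    else vs)
                  (visited, rest)).2
                ((pvNbrs x y).foldl
                  (fun (vs : PySem.Set (Int × Int) × List (Int × Int)) n =>
                    if 0 ≤ n.1 ∧ n.1 < height ∧ 0 ≤ n.2 ∧ n.2 < width then
                      if ¬ (PySem.Set.contains (pvOccupied grid width height) n = true) ∧
                          ¬ (PySem.Set.contains vs.1 n = true) then
                        (PySem.Set.add vs.1 n, n :: vs.2)
                      else vs
                    else vs)
                  (visited, rest)).1 (size + 1) := rfl
          rw [heq, nbr_fold_spec (pvNbrs x y) visited rest (nodup_pvNbrs x y)]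
          dsimp only
          have hSmem : ∀ q : Int × Int, q ∈ pvFreeSet grid width height ↔
              ((0 ≤ q.1 ∧ q.1 < height ∧ 0 ≤ q.2 ∧ q.2 < width) ∧
                q ∉ pvOccupied grid width height) := by
            intro q
            rw [free_iff_accept]
            unfold pvInBox
            rw [not_congr pvSet_contains_iff]
          set S := pvFreeSet grid width height with hSdef
          set acc := (pvNbrs x y).filter
            (fun n => decide ((0 ≤ n.1 ∧ n.1 < height ∧ 0 ≤ n.2 ∧ n.2 < width) ∧
              n ∉ pvOccupied grid width height ∧ n ∉ visited)) with haccdef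
          have hxW : (x, y) ∈ W := hstack _ List.mem_cons_self
          have hxcomp : (x, y) ∈ pvComp S s := hWc hxW
          have hxS : (x, y) ∈ S := (mem_pvComp.1 hxcomp).1
          have hrest : ∀ z ∈ rest, z ∈ W := fun z hz => hstack _ (List.mem_cons_of_mem _ hz)
          rcases List.nodup_cons.1 hnd with ⟨hxrest, hndrest⟩
          have haccP : ∀ q ∈ acc, q ∈ S ∧ q ∉ V ∪ W ∧ pvAdj (x, y) q := by
            intro q hq
            rcases List.mem_filter.1 hq with ⟨hqn, hqd⟩
            rw [decide_eq_true_iff] at hqd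
            obtain ⟨hbox, hocc, hvisq⟩ := hqd
            refine ⟨(hSmem q).2 ⟨hbox, hocc⟩, ?_, mem_pvNbrs.1 hqn⟩
            intro hq'
            exact hvisq (List.mem_toFinset.1 (hvis ▸ hq'))
          have hnbr_sat : ∀ q, pvStep S (x, y) q → q ∈ V ∪ W ∨ q ∈ acc := by
            intro q hs
            by_cases hqv : q ∈ visited
            · exact Or.inl (hvis ▸ List.mem_toFinset.2 hqv)
            · refine Or.inr (List.mem_filter.2 ⟨mem_pvNbrs.2 hs.2.2, ?_⟩)
              rw [decide_eq_true_iff]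
              rcases (hSmem q).1 hs.2.1 with ⟨hbox, hocc⟩
              exact ⟨hbox, hocc, hqv⟩
          have hnodupacc : acc.Nodup := List.Nodup.filter _ (nodup_pvNbrs x y)
          set N := acc.toFinset with hNdef
          have hNdis : ∀ q ∈ N, q ∉ V ∪ W := fun q hq =>
            (haccP q (List.mem_toFinset.1 hq)).2.1
          have hNcomp : N ⊆ pvComp S s := by
            intro q hq
            rcases haccP q (List.mem_toFinset.1 hq) with ⟨hqS, _, hadj⟩
            exact pvComp_closed s _ hxcomp q ⟨hxS, hqS, hadj⟩
          have hW'c : W ∪ N ⊆ pvComp S s := Finset.union_subset hWc hNcomp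
          have cardN : N.card = acc.length := List.toFinset_card_of_nodup hnodupacc
          have hdisWN : Disjoint W N := Finset.disjoint_left.2
            (fun a haW haN => absurd (Finset.mem_union_right V haW) (hNdis a haN))
          have hcardW' : (W ∪ N).card = W.card + acc.length := by
            rw [Finset.card_union_of_disjoint hdisWN, cardN]
          apply ih (acc.reverse ++ rest) (visited ++ acc) (size + 1) V (W ∪ N)
          · rw [List.toFinset_append, hvis, Finset.union_assoc]
          · exact hdisV
          · intro z hz
            rcases List.mem_append.1 hz with h | h
            · exact Finset.mem_union_right _ (List.mem_toFinset.2 (List.mem_reverse.1 h))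
            · exact Finset.mem_union_left _ (hrest z h)
          · rw [List.nodup_append]
            refine ⟨List.nodup_reverse.2 hnodupacc, hndrest, ?_⟩
            intro z hz z' hz'
            rintro rfl
            exact hNdis z (List.mem_toFinset.2 (List.mem_reverse.1 hz))
              (Finset.mem_union_right _ (hrest z hz'))
          · exact hW'c
          · exact Finset.mem_union_left _ hsW
          · intro z hz hznot q hstep
            rcases Finset.mem_union.1 hz with hzW | hzN
            · by_cases hzx : z = (x, y)
              · subst hzx
                rcases hnbr_sat q hstep with h | h
                · rcases Finset.mem_union.1 h with h' | h'
                  · exact Finset.mem_union_left _ h'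
                  · exact Finset.mem_union_right _ (Finset.mem_union_left _ h')
                · exact Finset.mem_union_right _
                    (Finset.mem_union_right _ (List.mem_toFinset.2 h))
              · have hzstack : z ∉ ((x, y) :: rest) := by
                  intro hmem
                  rcases List.mem_cons.1 hmem with h | h
                  · exact hzx h
                  · exact hznot (List.mem_append_right _ h)
                rcases Finset.mem_union.1 (hsat z hzW hzstack q hstep) with h | h
                · exact Finset.mem_union_left _ h
                · exact Finset.mem_union_right _ (Finset.mem_union_left _ h)
            · exact absurd (List.mem_append_left rest
                (List.mem_reverse.2 (List.mem_toFinset.1 hzN))) hznot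
          · have hlen : ((x, y) :: rest).length = rest.length + 1 := List.length_cons
            rw [hsize, hcardW']
            rw [List.length_append, List.length_reverse, hlen]
            push_cast
            ring
          · have h1 : W.card ≤ (pvComp S s).card := Finset.card_le_card hWc
            have h2 : (W ∪ N).card ≤ (pvComp S s).card := Finset.card_le_card hW'c
            have hlen : ((x, y) :: rest).length = rest.length + 1 := List.length_cons
            rw [hcardW'] at h2 ⊢
            rw [List.length_append, List.length_reverse]
            rw [hlen] at hfuel
            omega
-- ---- size bounds for the DFS fuel ----
lemma length_pvCells (height width : Int) :
    (pvCells height width).length = height.toNat * width.toNat := by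
  unfold pvCells
  rw [List.length_flatMap]
  have h2 : (PySem.List.pyRange 0 height 1).map
      (fun r => ((PySem.List.pyRange 0 width 1).map (fun c => (r, c))).length) =
      List.replicate height.toNat width.toNat := by
    apply List.eq_replicate_iff.2
    refine ⟨by simp [PySem.List.length_pyRange_one], ?_⟩
    intro b hb
    rcases List.mem_map.1 hb with ⟨r, _, rfl⟩
    rw [List.length_map, PySem.List.length_pyRange_one]
    simp
  rw [h2, List.sum_replicate, smul_eq_mul]

lemma card_pvFreeSet_le (grid : List Int) (width height : Int) :
    (pvFreeSet grid width height).card ≤ height.toNat * width.toNat := by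
  unfold pvFreeSet pvFreeOf
  calc _ ≤ ((pvCells height width).filter (fun p => !pvBitSet grid width p)).length :=
        List.toFinset_card_le _
    _ ≤ (pvCells height width).length := List.length_filter_le _ _
    _ = height.toNat * width.toNat := length_pvCells height width

lemma toNat_mul_of_box {width height : Int} {p : Int × Int}
    (h : pvInBox width height p) :
    (width * height).toNat = height.toNat * width.toNat := by
  obtain ⟨h1, h2, h3, h4⟩ := h
  have hw : 0 ≤ width := by omega
  have hh : 0 ≤ height := by omega
  obtain ⟨a, rfl⟩ := Int.eq_ofNat_of_zero_le hw
  obtain ⟨b, rfl⟩ := Int.eq_ofNat_of_zero_le hh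
  rw [← Nat.cast_mul, Int.toNat_natCast, Int.toNat_natCast, Int.toNat_natCast,
    Nat.mul_comm]

-- ---- outer loop of A ----
lemma pvLoopA_spec {grid : List Int} {width height required_area min_item_area : Int} :
    ∀ (cs : List (Int × Int)) (visited : PySem.Set (Int × Int)) (usable : Int)
      (V : Finset (Int × Int)),
      visited.toFinset = V →
      V ⊆ pvFreeSet grid width height →
      pvClosed (pvFreeSet grid width height) V →
      (∀ q ∈ pvFreeSet grid width height, q ∉ V → q ∈ cs) →
      (∀ q ∈ cs, pvInBox width height q) →
      usable = (pvCount (pvFreeSet grid width height) V min_item_area : Int) →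
      pvLoopA height width required_area min_item_area (pvOccupied grid width height)
          cs visited usable =
        decide (required_area ≤
          (pvCount (pvFreeSet grid width height) (pvFreeSet grid width height)
            min_item_area : Int)) := by
  intro cs
  induction cs with
  | nil =>
      intro visited usable V hvis hVsub hVcl hcov hcs husable
      have hVS : V = pvFreeSet grid width height := by
        apply Finset.Subset.antisymm hVsub
        intro q hq
        by_contra hqV
        exact (List.mem_nil_iff q).1 (hcov q hq hqV)
      show decide (required_area ≤ usable) = _
      rw [husable, hVS]
  | cons p rest ih =>
      intro visited usable V hvis hVsub hVcl hcov hcs husable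
      have hSmem : ∀ q : Int × Int, q ∈ pvFreeSet grid width height ↔
          (pvInBox width height q ∧
            ¬ (PySem.Set.contains (pvOccupied grid width height) q = true)) :=
        fun q => free_iff_accept
      show (if PySem.Set.contains (pvOccupied grid width height) p ||
              PySem.Set.contains visited p then _ else _) = _
      cases hc : (PySem.Set.contains (pvOccupied grid width height) p ||
          PySem.Set.contains visited p) with
      | true =>
          rw [if_pos rfl]
          apply ih visited usable V hvis hVsub hVcl ?_ (fun q hq => hcs q (List.mem_cons_of_mem _ hq)) husable
          intro q hq hqV
          rcases List.mem_cons.1 (hcov q hq hqV) with rfl | h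
          · exfalso
            rcases Bool.or_eq_true_iff.1 hc with h' | h'
            · exact ((hSmem q).1 hq).2 h'
            · exact hqV (hvis ▸ List.mem_toFinset.2 (pvSet_contains_iff.1 h'))
          · exact h
      | false =>
          rw [if_neg (by simp)]
          rcases Bool.or_eq_false_iff.1 hc with ⟨hocc, hvisp⟩
          have hpbox : pvInBox width height p := hcs p List.mem_cons_self
          have hpS : p ∈ pvFreeSet grid width height :=
            (hSmem p).2 ⟨hpbox, by rw [hocc]; exact Bool.false_ne_true⟩
          have hpvisited : p ∉ visited := fun h => by
            rw [pvSet_contains_iff.2 h] at hvisp; cases hvisp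
          have hpV : p ∉ V := fun h => hpvisited (List.mem_toFinset.1 (hvis ▸ h))
          have hadd : PySem.Set.add visited p = visited ++ [p] := by
            unfold PySem.Set.add
            rw [if_neg (fun h => hpvisited (pvSet_contains_iff.1 h))]
          have hcompcard : 1 ≤ (pvComp (pvFreeSet grid width height) p).card :=
            Finset.card_pos.2 ⟨p, self_mem_pvComp hpS⟩
          have hcomple : (pvComp (pvFreeSet grid width height) p).card ≤
              (width * height).toNat := by
            rw [toNat_mul_of_box hpbox]
            exact le_trans (Finset.card_le_card pvComp_subset)
              (card_pvFreeSet_le grid width height)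
          have hdfs := pvDfs_spec (s := p) ((width * height).toNat + 1)
            [p] (PySem.Set.add visited p) 0 V {p}
            (by rw [hadd, List.toFinset_append, hvis]; simp)
            (pvClosed_disjoint_comp hVcl hpV)
            (by intro z hz; rw [List.mem_singleton.1 hz]; exact Finset.mem_singleton_self p)
            (List.nodup_singleton p)
            (by intro z hz; rw [Finset.mem_singleton.1 hz]; exact self_mem_pvComp hpS)
            (Finset.mem_singleton_self p)
            (by intro z hz hznot; exact absurd (List.mem_singleton.2 (Finset.mem_singleton.1 hz)) hznot)
            (by simp)
            (by simp; omega)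
          have hcovrest : ∀ q ∈ pvFreeSet grid width height,
              q ∉ V ∪ pvComp (pvFreeSet grid width height) p → q ∈ rest := by
            intro q hq hqV
            rcases List.mem_cons.1 (hcov q hq (fun h => hqV (Finset.mem_union_left _ h))) with rfl | h
            · exact absurd (Finset.mem_union_right _ (self_mem_pvComp hq)) hqV
            · exact h
          set r1 := pvDfs (pvOccupied grid width height) height width
            ((width * height).toNat + 1) [p] (PySem.Set.add visited p) 0 with hr1
          set usable' := (if min_item_area ≤ r1.2 then usable + r1.2 else usable)
            with husable'
          have husable'2 : usable' = (pvCount (pvFreeSet grid width height)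
              (V ∪ pvComp (pvFreeSet grid width height) p) min_item_area : Int) := by
            rw [husable', hdfs.2, husable,
              pvCount_union_comp min_item_area (pvClosed_disjoint_comp hVcl hpV) hpS]
            split_ifs <;> push_cast <;> ring
          have htail := ih r1.1 usable' (V ∪ pvComp (pvFreeSet grid width height) p)
            hdfs.1
            (Finset.union_subset hVsub pvComp_subset)
            (pvClosed_union hVcl (pvComp_closed p))
            hcovrest
            (fun q hq => hcs q (List.mem_cons_of_mem _ hq))
            husable'2
          show (if required_area ≤ usable' then true
              else pvLoopA height width required_area min_item_area
                (pvOccupied grid width height) rest r1.1 usable') = _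
          by_cases hearly : required_area ≤ usable'
          · rw [if_pos hearly]
            have hle : (pvCount (pvFreeSet grid width height)
                (V ∪ pvComp (pvFreeSet grid width height) p) min_item_area : Int) ≤
                (pvCount (pvFreeSet grid width height) (pvFreeSet grid width height)
                  min_item_area : Int) := by
              exact_mod_cast pvCount_mono
                (Finset.union_subset hVsub pvComp_subset) min_item_area
            symm
            rw [decide_eq_true_iff]
            rw [husable'2] at hearly
            exact le_trans hearly hle
          · rw [if_neg hearly, htail]

-- ---- small PySem.Dict facts used by the B side ----
lemma pvDict_get?_erase {κ ν : Type} [BEq κ] [LawfulBEq κ] [DecidableEq κ]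
    (d : PySem.Dict κ ν) (k x : κ) :
    (d.erase k).get? x = if x = k then none else d.get? x := by
  rcases d with ⟨items⟩
  simp only [PySem.Dict.erase, PySem.Dict.get?]
  induction items with
  | nil => simp
  | cons hd tl ih =>
      rw [List.filter_cons]
      by_cases hdk : hd.1 = k
      · have : (!hd.1 == k) = false := by simp [hdk]
        rw [this]
        simp only [Bool.false_eq_true, if_false]
        by_cases hxk : x = k
        · rw [ih, if_pos hxk, if_pos hxk]
        · rw [ih, if_neg hxk, if_neg hxk,
            List.find?_cons_of_neg (by simp; exact fun h => hxk (hdk ▸ h.symm))]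
      · have : (!hd.1 == k) = true := by simp [hdk]
        rw [this]
        simp only [if_pos]
        by_cases hdx : hd.1 = x
        · have hxk : ¬ x = k := fun h => hdk (hdx.trans h)
          rw [List.find?_cons_of_pos (by simp [hdx]),
            if_neg hxk, List.find?_cons_of_pos (by simp [hdx])]
        · rw [List.find?_cons_of_neg (by simp [hdx]), ih]
          by_cases hxk : x = k
          · rw [if_pos hxk, if_pos hxk]
          · rw [if_neg hxk, if_neg hxk, List.find?_cons_of_neg (by simp [hdx])]

lemma pvDict_keys_insert_of_contains {κ ν : Type} [BEq κ] [LawfulBEq κ] [DecidableEq κ]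
    (d : PySem.Dict κ ν) (k : κ) (v : ν) (h : d.contains k = true) :
    (d.insert k v).keys = d.keys := by
  simp only [PySem.Dict.insert, h, if_pos, PySem.Dict.keys]
  rcases d with ⟨items⟩
  simp only [List.map_map]
  apply List.map_congr_left
  intro p _
  by_cases hp : p.1 = k
  · simp [Function.comp, hp]
  · simp [Function.comp, hp]

lemma pvDict_keys_insert_of_not_contains {κ ν : Type} [BEq κ] [LawfulBEq κ]
    (d : PySem.Dict κ ν) (k : κ) (v : ν) (h : d.contains k = false) :
    (d.insert k v).keys = d.keys ++ [k] := by
  simp [PySem.Dict.insert, h, PySem.Dict.keys]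

lemma pvDict_nodup_keys_insert {κ ν : Type} [BEq κ] [LawfulBEq κ] [DecidableEq κ]
    (d : PySem.Dict κ ν) (k : κ) (v : ν) (h : d.keys.Nodup) :
    (d.insert k v).keys.Nodup := by
  cases hc : d.contains k with
  | true => rwa [pvDict_keys_insert_of_contains d k v hc]
  | false =>
      rw [pvDict_keys_insert_of_not_contains d k v hc]
      have hk : k ∉ d.keys := by
        intro hmem
        rw [PySem.Dict.contains_eq_decide_mem_keys] at hc
        simp at hc
        exact hc hmem
      exact List.Nodup.append h (List.nodup_singleton k)
        (fun a ha hb => hk ((List.mem_singleton.1 hb) ▸ ha))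

lemma pvDict_keys_erase_sublist {κ ν : Type} [BEq κ] (d : PySem.Dict κ ν) (k : κ) :
    (d.erase k).keys.Sublist d.keys := by
  simp only [PySem.Dict.erase, PySem.Dict.keys]
  exact List.filter_sublist.map _

lemma pvDict_nodup_keys_erase {κ ν : Type} [BEq κ] (d : PySem.Dict κ ν) (k : κ)
    (h : d.keys.Nodup) : (d.erase k).keys.Nodup :=
  (pvDict_keys_erase_sublist d k).nodup h

lemma pvDict_mem_keys_of_get?_eq_some {κ ν : Type} [BEq κ] [LawfulBEq κ]
    {d : PySem.Dict κ ν} {k : κ} {v : ν} (h : d.get? k = some v) : k ∈ d.keys := by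
  by_contra hk
  rw [(PySem.Dict.get?_eq_none_iff_not_mem_keys d k).2 hk] at h
  cases h

lemma pvLabel_foldl_insert_const {u : Int} :
    ∀ (ll : List (Int × Int)) (label : PySem.Dict (Int × Int) Int) (a : Int × Int),
      ((ll.foldl (fun d cell => d.insert cell u) label).get? a) =
        if a ∈ ll then some u else label.get? a := by
  intro ll
  induction ll with
  | nil => intro label a; simp
  | cons c tl ih =>
      intro label a
      rw [List.foldl_cons, ih]
      by_cases hatl : a ∈ tl
      · rw [if_pos hatl, if_pos (List.mem_cons_of_mem _ hatl)]
      · rw [if_neg hatl]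
        by_cases hac : a = c
        · subst hac
          rw [if_pos List.mem_cons_self, PySem.Dict.get?_insert_self]
        · rw [if_neg (fun h => by
            rcases List.mem_cons.1 h with h' | h'
            · exact hac h'
            · exact hatl h'), PySem.Dict.get?_insert_of_ne _ _ hac]

-- ---- components after inserting one vertex whose neighbours lie in a closed union U ----
lemma pvComp_insert_general {P : Finset (Int × Int)} {v : Int × Int} (hv : v ∉ P)
    {U : Finset (Int × Int)} (hUsub : U ⊆ P)
    (hUcomp : ∀ a ∈ U, pvComp P a ⊆ U)
    (hUconn : ∀ a ∈ U, pvConn (insert v P) v a)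
    (hadj : ∀ q ∈ P, pvAdj v q → q ∈ U) :
    pvComp (insert v P) v = insert v U ∧
    (∀ a ∈ P, a ∈ U → pvComp (insert v P) a = insert v U) ∧
    (∀ a ∈ P, a ∉ U → pvComp (insert v P) a = pvComp P a) := by
  have hvP' : v ∈ insert v P := Finset.mem_insert_self _ _
  have hcompv : pvComp (insert v P) v = insert v U := by
    ext b
    constructor
    · intro hb0
      rcases mem_pvComp.1 hb0 with ⟨hb, hconn⟩
      rcases Finset.mem_insert.1 hb with rfl | hbP
      · exact Finset.mem_insert_self _ _
      · rcases (pvConn_insert_v_iff hv hbP).1 hconn with ⟨n, hnP, hadj', hconn'⟩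
        exact Finset.mem_insert_of_mem
          (hUcomp n (hadj n hnP hadj') (mem_pvComp.2 ⟨hbP, hconn'⟩))
    · intro hb0
      rcases Finset.mem_insert.1 hb0 with rfl | hbU
      · exact mem_pvComp.2 ⟨hvP', Relation.ReflTransGen.refl⟩
      · exact mem_pvComp.2 ⟨Finset.mem_insert_of_mem (hUsub hbU), hUconn b hbU⟩
  refine ⟨hcompv, ?_, ?_⟩
  · intro a haP haU
    rw [← hcompv]
    exact (pvComp_eq_of_conn (hUconn a haU)).symm
  · intro a haP haU
    apply Finset.Subset.antisymm
    · intro b hb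
      rcases mem_pvComp.1 hb with ⟨hb', hconn⟩
      rcases Finset.mem_insert.1 hb' with rfl | hbP
      · exfalso
        rcases (pvConn_insert_master hv haP hconn).1 rfl with ⟨n, hnP, hadj', hconn'⟩
        exact haU (hUcomp n (hadj n hnP hadj') (mem_pvComp.2 ⟨haP, hconn'.symm⟩))
      · rcases (pvConn_insert_ab_iff hv haP hbP).1 hconn with h | ⟨n1, n2, hn1, hn2, ha1, ha2, hc1, hc2⟩
        · exact mem_pvComp.2 ⟨hbP, h⟩
        · exact absurd (hUcomp n1 (hadj n1 hn1 ha1) (mem_pvComp.2 ⟨haP, hc1.symm⟩)) haU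
    · intro b hb
      rcases mem_pvComp.1 hb with ⟨hbP, hconn⟩
      exact mem_pvComp.2 ⟨Finset.mem_insert_of_mem hbP,
        hconn.mono (Finset.subset_insert _ _)⟩

-- ---- the invariant of B's single pass ----
def pvMembersInv (P : Finset (Int × Int)) (members : PySem.Dict Int (List (Int × Int))) : Prop :=
  members.keys.Nodup ∧
  (∀ lab l, members.get? lab = some l → l ≠ [] ∧ l.Nodup ∧ ∀ a ∈ l, l.toFinset = pvComp P a) ∧
  (∀ a ∈ P, ∃ lab l, members.get? lab = some l ∧ a ∈ l) ∧
  (∀ lab lab' l l', lab ≠ lab' → members.get? lab = some l → members.get? lab' = some l' →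
    ∀ a ∈ l, a ∉ l')

def pvLabelInv (P : Finset (Int × Int)) (label : PySem.Dict (Int × Int) Int)
    (members : PySem.Dict Int (List (Int × Int))) : Prop :=
  (∀ a lab, label.get? a = some lab → ∃ l, members.get? lab = some l ∧ a ∈ l) ∧
  (∀ a ∈ P, ∃ lab, label.get? a = some lab)

lemma pvMembers_list_subset {P : Finset (Int × Int)} {members : PySem.Dict Int (List (Int × Int))}
    (hM : pvMembersInv P members) {lab : Int} {l : List (Int × Int)}
    (hl : members.get? lab = some l) : ∀ a ∈ l, a ∈ P := by
  intro a ha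
  have := (hM.2.1 lab l hl).2.2 a ha
  exact pvComp_subset (this ▸ List.mem_toFinset.2 ha)

lemma pvSplit_facts {height width : Int} {done : List (Int × Int)} {p : Int × Int}
    {rest : List (Int × Int)} (h : pvCells height width = done ++ p :: rest) :
    p ∉ done ∧ (∀ q ∈ done, pvLex q p) ∧
      (∀ q, pvInBox width height q → pvLex q p → q ∈ done) := by
  have pw := pairwise_pvLex_pvCells height width
  rw [h, List.pairwise_append] at pw
  obtain ⟨pw1, pw2, hcross⟩ := pw
  have hlex : ∀ q ∈ done, pvLex q p := fun q hq => hcross q hq p List.mem_cons_self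
  refine ⟨fun hp => by have := hlex p hp; unfold pvLex at this; omega, hlex, ?_⟩
  intro q hbox hqp
  have hq : q ∈ pvCells height width := mem_pvCells.2 hbox
  rw [h] at hq
  rcases List.mem_append.1 hq with hq | hq
  · exact hq
  · rcases List.mem_cons.1 hq with rfl | hq
    · exfalso; unfold pvLex at hqp; omega
    · exfalso
      have := (List.pairwise_cons.1 pw2).1 q hq
      unfold pvLex at this hqp; omega

lemma pvFreeOf_append_free {grid : List Int} {width : Int} {done : List (Int × Int)}
    {p : Int × Int} (h : pvBitSet grid width p = false) :
    pvFreeOf grid width (done ++ [p]) = insert p (pvFreeOf grid width done) := by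
  unfold pvFreeOf
  rw [List.filter_append, List.toFinset_append]
  simp [h, Finset.union_singleton]

lemma pvFreeOf_append_occ {grid : List Int} {width : Int} {done : List (Int × Int)}
    {p : Int × Int} (h : pvBitSet grid width p = true) :
    pvFreeOf grid width (done ++ [p]) = pvFreeOf grid width done := by
  unfold pvFreeOf
  rw [List.filter_append, List.toFinset_append]
  simp [h]

lemma mem_pvFreeOf {grid : List Int} {width : Int} {done : List (Int × Int)} {q : Int × Int} :
    q ∈ pvFreeOf grid width done ↔ q ∈ done ∧ pvBitSet grid width q = false := by
  simp [pvFreeOf]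

-- ---- extending the partition by one free cell that joins one existing region ----
lemma pvInv_extend_join {P : Finset (Int × Int)} {p : Int × Int} (hp : p ∉ P)
    {members m' : PySem.Dict Int (List (Int × Int))}
    {label label' : PySem.Dict (Int × Int) Int}
    {lab0 : Int} {l0 : List (Int × Int)}
    (hl0 : members.get? lab0 = some l0)
    (hadjU : ∀ q ∈ P, pvAdj p q → q ∈ l0.toFinset)
    (hseed : ∃ n ∈ l0, pvAdj p n)
    (hM : pvMembersInv P members) (hL : pvLabelInv P label members)
    (hm' : ∀ x, m'.get? x = if x = lab0 then some (l0 ++ [p]) else members.get? x)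
    (hknodup : m'.keys.Nodup)
    (hlab' : ∀ a, label'.get? a = if a = p then some lab0 else label.get? a) :
    pvMembersInv (insert p P) m' ∧ pvLabelInv (insert p P) label' m' := by
  have hl0sub : ∀ a ∈ l0, a ∈ P := pvMembers_list_subset hM hl0
  have hl0comp : ∀ a ∈ l0, l0.toFinset = pvComp P a := (hM.2.1 lab0 l0 hl0).2.2
  have hl0nodup : l0.Nodup := (hM.2.1 lab0 l0 hl0).2.1
  have hUsub : l0.toFinset ⊆ P := fun a ha => hl0sub a (List.mem_toFinset.1 ha)
  have hUcomp : ∀ a ∈ l0.toFinset, pvComp P a ⊆ l0.toFinset := by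
    intro a ha
    rw [← hl0comp a (List.mem_toFinset.1 ha)]
  have hUconn : ∀ a ∈ l0.toFinset, pvConn (insert p P) p a := by
    rcases hseed with ⟨n, hn, hadjn⟩
    intro a ha
    have hstep : pvStep (insert p P) p n :=
      ⟨Finset.mem_insert_self _ _, Finset.mem_insert_of_mem (hl0sub n hn), hadjn⟩
    have hconn : pvConn P n a := by
      have := (hl0comp n hn) ▸ ha
      exact (mem_pvComp.1 this).2
    exact Relation.ReflTransGen.head hstep (hconn.mono (Finset.subset_insert _ _))
  obtain ⟨hcv, hcin, hcout⟩ := pvComp_insert_general hp hUsub hUcomp hUconn hadjU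
  have hnew_toFinset : (l0 ++ [p]).toFinset = insert p l0.toFinset := by
    rw [List.toFinset_append]
    simp [Finset.union_singleton]
  have hpl0 : p ∉ l0 := fun h => hp (hl0sub p h)
  constructor
  · refine ⟨hknodup, ?_, ?_, ?_⟩
    · intro lab l hl
      rw [hm'] at hl
      by_cases hlab : lab = lab0
      · rw [if_pos hlab] at hl
        injection hl with hl
        subst hl
        refine ⟨by simp, ?_, ?_⟩
        · rw [List.nodup_append]
          exact ⟨hl0nodup, List.nodup_singleton _,
            fun a ha b hb hab => hpl0 ((List.mem_singleton.1 hb) ▸ hab ▸ ha)⟩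
        · intro a ha
          rcases List.mem_append.1 ha with ha | ha
          · rw [hnew_toFinset, hcin a (hl0sub a ha) (List.mem_toFinset.2 ha)]
          · rw [List.mem_singleton.1 ha, hnew_toFinset, hcv]
      · rw [if_neg hlab] at hl
        obtain ⟨hne, hnd, hcompl⟩ := hM.2.1 lab l hl
        refine ⟨hne, hnd, ?_⟩
        intro a ha
        have haP : a ∈ P := pvMembers_list_subset hM hl a ha
        have haU : a ∉ l0.toFinset := fun hmem =>
          hM.2.2.2 lab lab0 l l0 hlab hl hl0 a ha (List.mem_toFinset.1 hmem)
        rw [hcout a haP haU, hcompl a ha]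
    · intro a ha
      rcases Finset.mem_insert.1 ha with rfl | haP
      · exact ⟨lab0, l0 ++ [a], by rw [hm', if_pos rfl], List.mem_append_right _ List.mem_cons_self⟩
      · rcases hM.2.2.1 a haP with ⟨lab, l, hl, hal⟩
        by_cases hlab : lab = lab0
        · subst hlab
          rw [hl0] at hl
          injection hl with hl
          exact ⟨lab, l0 ++ [p], by rw [hm', if_pos rfl],
            List.mem_append_left _ (hl ▸ hal)⟩
        · exact ⟨lab, l, by rw [hm', if_neg hlab]; exact hl, hal⟩
    · intro lab lab' l l' hne h1 h2 a hal hal'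
      rw [hm'] at h1 h2
      by_cases hlab : lab = lab0
      · rw [if_pos hlab] at h1
        have hlab' : ¬ lab' = lab0 := fun h => hne (hlab.trans h.symm)
        rw [if_neg hlab'] at h2
        injection h1 with h1
        subst h1
        rcases List.mem_append.1 hal with ha | ha
        · exact hM.2.2.2 lab0 lab' l0 l' (fun h => hlab' h.symm) hl0 h2 a ha hal'
        · have hap : a = p := List.mem_singleton.1 ha
          subst hap
          exact hp (pvMembers_list_subset hM h2 _ hal')
      · rw [if_neg hlab] at h1
        by_cases hlab' : lab' = lab0
        · rw [if_pos hlab'] at h2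
          injection h2 with h2
          subst h2
          rcases List.mem_append.1 hal' with hb | hb
          · exact hM.2.2.2 lab lab0 l l0 hlab h1 hl0 a hal hb
          · exact hp ((List.mem_singleton.1 hb) ▸ pvMembers_list_subset hM h1 a hal)
        · rw [if_neg hlab'] at h2
          exact hM.2.2.2 lab lab' l l' hne h1 h2 a hal hal'
  · constructor
    · intro a lab hget
      rw [hlab'] at hget
      by_cases hap : a = p
      · rw [if_pos hap] at hget
        injection hget with hget
        subst hget
        exact ⟨l0 ++ [p], by rw [hm', if_pos rfl], hap ▸ List.mem_append_right _ List.mem_cons_self⟩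
      · rw [if_neg hap] at hget
        rcases hL.1 a lab hget with ⟨l, hl, hal⟩
        by_cases hlab : lab = lab0
        · subst hlab
          rw [hl0] at hl
          injection hl with hl
          exact ⟨l0 ++ [p], by rw [hm', if_pos rfl], List.mem_append_left _ (hl ▸ hal)⟩
        · exact ⟨l, by rw [hm', if_neg hlab]; exact hl, hal⟩
    · intro a ha
      rcases Finset.mem_insert.1 ha with rfl | haP
      · exact ⟨lab0, by rw [hlab', if_pos rfl]⟩
      · rcases hL.2 a haP with ⟨lab, hlab⟩
        by_cases hap : a = p
        · exact ⟨lab0, by rw [hlab', if_pos hap]⟩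
        · exact ⟨lab, by rw [hlab', if_neg hap]; exact hlab⟩

-- ---- extending the partition by an isolated free cell ----
lemma pvInv_extend_new {P : Finset (Int × Int)} {p : Int × Int} (hp : p ∉ P)
    {members m' : PySem.Dict Int (List (Int × Int))}
    {label label' : PySem.Dict (Int × Int) Int} {fresh : Int}
    (hadjU : ∀ q ∈ P, ¬ pvAdj p q)
    (hM : pvMembersInv P members) (hL : pvLabelInv P label members)
    (hfresh_not : members.get? fresh = none)
    (hm' : ∀ x, m'.get? x = if x = fresh then some [p] else members.get? x)
    (hknodup : m'.keys.Nodup)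
    (hlab' : ∀ a, label'.get? a = if a = p then some fresh else label.get? a) :
    pvMembersInv (insert p P) m' ∧ pvLabelInv (insert p P) label' m' := by
  obtain ⟨hcv, hcin, hcout⟩ := pvComp_insert_general (U := (∅ : Finset (Int × Int))) hp
    (Finset.empty_subset _) (by simp) (by simp)
    (fun q hq hadj => absurd hadj (hadjU q hq))
  have hcout' : ∀ a ∈ P, pvComp (insert p P) a = pvComp P a :=
    fun a ha => hcout a ha (Finset.notMem_empty a)
  constructor
  · refine ⟨hknodup, ?_, ?_, ?_⟩
    · intro lab l hl
      rw [hm'] at hl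
      by_cases hlab : lab = fresh
      · rw [if_pos hlab] at hl
        injection hl with hl
        subst hl
        refine ⟨by simp, List.nodup_singleton _, ?_⟩
        intro a ha
        rw [List.mem_singleton.1 ha]
        rw [hcv]
        simp
      · rw [if_neg hlab] at hl
        obtain ⟨hne, hnd, hcompl⟩ := hM.2.1 lab l hl
        refine ⟨hne, hnd, fun a ha => ?_⟩
        rw [hcout' a (pvMembers_list_subset hM hl a ha), hcompl a ha]
    · intro a ha
      rcases Finset.mem_insert.1 ha with rfl | haP
      · exact ⟨fresh, [a], by rw [hm', if_pos rfl], List.mem_singleton_self a⟩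
      · rcases hM.2.2.1 a haP with ⟨lab, l, hl, hal⟩
        have hlab : ¬ lab = fresh := fun h => by rw [h, hfresh_not] at hl; cases hl
        exact ⟨lab, l, by rw [hm', if_neg hlab]; exact hl, hal⟩
    · intro lab lab' l l' hne h1 h2 a hal hal'
      rw [hm'] at h1 h2
      by_cases hlab : lab = fresh
      · rw [if_pos hlab] at h1
        have hlab2 : ¬ lab' = fresh := fun h => hne (hlab.trans h.symm)
        rw [if_neg hlab2] at h2
        injection h1 with h1
        subst h1
        have hap : a = p := List.mem_singleton.1 hal
        subst hap
        exact hp (pvMembers_list_subset hM h2 _ hal')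
      · rw [if_neg hlab] at h1
        by_cases hlab2 : lab' = fresh
        · rw [if_pos hlab2] at h2
          injection h2 with h2
          subst h2
          have hap : a = p := List.mem_singleton.1 hal'
          exact hp (hap ▸ pvMembers_list_subset hM h1 a hal)
        · rw [if_neg hlab2] at h2
          exact hM.2.2.2 lab lab' l l' hne h1 h2 a hal hal'
  · constructor
    · intro a lab hget
      rw [hlab'] at hget
      by_cases hap : a = p
      · rw [if_pos hap] at hget
        injection hget with hget
        subst hget
        exact ⟨[p], by rw [hm', if_pos rfl], hap ▸ List.mem_singleton_self p⟩
      · rw [if_neg hap] at hget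
        rcases hL.1 a lab hget with ⟨l, hl, hal⟩
        have hlab : ¬ lab = fresh := fun h => by rw [h, hfresh_not] at hl; cases hl
        exact ⟨l, by rw [hm', if_neg hlab]; exact hl, hal⟩
    · intro a ha
      rcases Finset.mem_insert.1 ha with rfl | haP
      · exact ⟨fresh, by rw [hlab', if_pos rfl]⟩
      · rcases hL.2 a haP with ⟨lab, hlab⟩
        by_cases hap : a = p
        · exact ⟨fresh, by rw [hlab', if_pos hap]⟩
        · exact ⟨lab, by rw [hlab', if_neg hap]; exact hlab⟩

-- ---- extending the partition by a free cell that merges two regions ----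
lemma pvInv_extend_merge {P : Finset (Int × Int)} {p : Int × Int} (hp : p ∉ P)
    {members m' : PySem.Dict Int (List (Int × Int))}
    {label label' : PySem.Dict (Int × Int) Int} {u labl : Int} {lu ll : List (Int × Int)}
    (hu : members.get? u = some lu) (hl : members.get? labl = some ll) (hul : u ≠ labl)
    (hadjU : ∀ q ∈ P, pvAdj p q → q ∈ lu.toFinset ∪ ll.toFinset)
    (hseedu : ∃ n ∈ lu, pvAdj p n) (hseedl : ∃ n ∈ ll, pvAdj p n)
    (hM : pvMembersInv P members) (hL : pvLabelInv P label members)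
    (hm' : ∀ x, m'.get? x = if x = u then some (lu ++ ll ++ [p])
      else if x = labl then none else members.get? x)
    (hknodup : m'.keys.Nodup)
    (hlab' : ∀ a, label'.get? a = if a = p then some u
      else if a ∈ ll then some u else label.get? a) :
    pvMembersInv (insert p P) m' ∧ pvLabelInv (insert p P) label' m' := by
  have hlusub : ∀ a ∈ lu, a ∈ P := pvMembers_list_subset hM hu
  have hllsub : ∀ a ∈ ll, a ∈ P := pvMembers_list_subset hM hl
  have hlucomp : ∀ a ∈ lu, lu.toFinset = pvComp P a := (hM.2.1 u lu hu).2.2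
  have hllcomp : ∀ a ∈ ll, ll.toFinset = pvComp P a := (hM.2.1 labl ll hl).2.2
  have hlunodup : lu.Nodup := (hM.2.1 u lu hu).2.1
  have hllnodup : ll.Nodup := (hM.2.1 labl ll hl).2.1
  have hdisull : ∀ a ∈ lu, a ∉ ll := hM.2.2.2 u labl lu ll hul hu hl
  set U := lu.toFinset ∪ ll.toFinset with hUdef
  have hUsub : U ⊆ P := Finset.union_subset
    (fun a ha => hlusub a (List.mem_toFinset.1 ha))
    (fun a ha => hllsub a (List.mem_toFinset.1 ha))
  have hUcomp : ∀ a ∈ U, pvComp P a ⊆ U := by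
    intro a ha
    rcases Finset.mem_union.1 ha with ha | ha
    · rw [← hlucomp a (List.mem_toFinset.1 ha)]
      exact Finset.subset_union_left
    · rw [← hllcomp a (List.mem_toFinset.1 ha)]
      exact Finset.subset_union_right
  have hUconn : ∀ a ∈ U, pvConn (insert p P) p a := by
    intro a ha
    rcases Finset.mem_union.1 ha with ha | ha
    · rcases hseedu with ⟨n, hn, hadjn⟩
      refine Relation.ReflTransGen.head
        ⟨Finset.mem_insert_self _ _, Finset.mem_insert_of_mem (hlusub n hn), hadjn⟩ ?_
      exact ((mem_pvComp.1 ((hlucomp n hn) ▸ ha)).2).mono (Finset.subset_insert _ _)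
    · rcases hseedl with ⟨n, hn, hadjn⟩
      refine Relation.ReflTransGen.head
        ⟨Finset.mem_insert_self _ _, Finset.mem_insert_of_mem (hllsub n hn), hadjn⟩ ?_
      exact ((mem_pvComp.1 ((hllcomp n hn) ▸ ha)).2).mono (Finset.subset_insert _ _)
  obtain ⟨hcv, hcin, hcout⟩ := pvComp_insert_general hp hUsub hUcomp hUconn hadjU
  have hpl : p ∉ lu ++ ll := by
    intro h
    rcases List.mem_append.1 h with h | h
    · exact hp (hlusub p h)
    · exact hp (hllsub p h)
  have hnew_toFinset : (lu ++ ll ++ [p]).toFinset = insert p U := by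
    rw [List.toFinset_append, List.toFinset_append]
    simp [hUdef, Finset.union_singleton]
  have hnew_nodup : (lu ++ ll ++ [p]).Nodup := by
    rw [List.nodup_append]
    refine ⟨?_, List.nodup_singleton _, ?_⟩
    · rw [List.nodup_append]
      exact ⟨hlunodup, hllnodup, fun a ha b hb hab => hdisull a ha (hab ▸ hb)⟩
    · intro a ha b hb hab
      exact hpl ((List.mem_singleton.1 hb) ▸ hab ▸ ha)
  have hmem_new : ∀ a, a ∈ lu ++ ll ++ [p] ↔ (a ∈ lu ∨ a ∈ ll ∨ a = p) := by
    intro a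
    simp [List.mem_append]
  constructor
  · refine ⟨hknodup, ?_, ?_, ?_⟩
    · intro lab l hlget
      rw [hm'] at hlget
      by_cases hlab : lab = u
      · rw [if_pos hlab] at hlget
        injection hlget with hlget
        subst hlget
        refine ⟨by simp, hnew_nodup, ?_⟩
        intro a ha
        rcases (hmem_new a).1 ha with h | h | h
        · rw [hnew_toFinset, hcin a (hlusub a h) (Finset.mem_union_left _ (List.mem_toFinset.2 h))]
        · rw [hnew_toFinset, hcin a (hllsub a h) (Finset.mem_union_right _ (List.mem_toFinset.2 h))]
        · rw [h, hnew_toFinset, hcv]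
      · rw [if_neg hlab] at hlget
        by_cases hlab2 : lab = labl
        · rw [if_pos hlab2] at hlget; cases hlget
        · rw [if_neg hlab2] at hlget
          obtain ⟨hne, hnd, hcompl⟩ := hM.2.1 lab l hlget
          refine ⟨hne, hnd, fun a ha => ?_⟩
          have haP : a ∈ P := pvMembers_list_subset hM hlget a ha
          have haU : a ∉ U := by
            intro hmem
            rcases Finset.mem_union.1 hmem with h | h
            · exact hM.2.2.2 lab u l lu hlab hlget hu a ha (List.mem_toFinset.1 h)
            · exact hM.2.2.2 lab labl l ll hlab2 hlget hl a ha (List.mem_toFinset.1 h)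
          rw [hcout a haP haU, hcompl a ha]
    · intro a ha
      rcases Finset.mem_insert.1 ha with rfl | haP
      · exact ⟨u, lu ++ ll ++ [a], by rw [hm', if_pos rfl],
          (hmem_new a).2 (Or.inr (Or.inr rfl))⟩
      · rcases hM.2.2.1 a haP with ⟨lab, l, hlget, hal⟩
        by_cases hlab : lab = u
        · rw [hlab, hu] at hlget
          injection hlget with hlget
          exact ⟨u, lu ++ ll ++ [p], by rw [hm', if_pos rfl],
            (hmem_new a).2 (Or.inl (hlget ▸ hal))⟩
        · by_cases hlab2 : lab = labl
          · rw [hlab2, hl] at hlget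
            injection hlget with hlget
            exact ⟨u, lu ++ ll ++ [p], by rw [hm', if_pos rfl],
              (hmem_new a).2 (Or.inr (Or.inl (hlget ▸ hal)))⟩
          · exact ⟨lab, l, by rw [hm', if_neg hlab, if_neg hlab2]; exact hlget, hal⟩
    · intro lab lab' l l' hne h1 h2 a hal hal'
      rw [hm'] at h1 h2
      by_cases hlab : lab = u
      · rw [if_pos hlab] at h1
        have hlab2 : ¬ lab' = u := fun h => hne (hlab.trans h.symm)
        rw [if_neg hlab2] at h2
        by_cases hlab3 : lab' = labl
        · rw [if_pos hlab3] at h2; cases h2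
        · rw [if_neg hlab3] at h2
          injection h1 with h1
          subst h1
          rcases (hmem_new a).1 hal with h | h | h
          · exact hM.2.2.2 u lab' lu l' (fun hh => hlab2 hh.symm) hu h2 a h hal'
          · exact hM.2.2.2 labl lab' ll l' (fun hh => hlab3 hh.symm) hl h2 a h hal'
          · subst h
            exact hp (pvMembers_list_subset hM h2 _ hal')
      · rw [if_neg hlab] at h1
        by_cases hlabl : lab = labl
        · rw [if_pos hlabl] at h1; cases h1
        · rw [if_neg hlabl] at h1
          by_cases hlab2 : lab' = u
          · rw [if_pos hlab2] at h2
            injection h2 with h2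
            subst h2
            rcases (hmem_new a).1 hal' with h | h | h
            · exact hM.2.2.2 lab u l lu hlab h1 hu a hal h
            · exact hM.2.2.2 lab labl l ll hlabl h1 hl a hal h
            · exact hp (h ▸ pvMembers_list_subset hM h1 a hal)
          · rw [if_neg hlab2] at h2
            by_cases hlab3 : lab' = labl
            · rw [if_pos hlab3] at h2; cases h2
            · rw [if_neg hlab3] at h2
              exact hM.2.2.2 lab lab' l l' hne h1 h2 a hal hal'
  · constructor
    · intro a lab hget
      rw [hlab'] at hget
      by_cases hap : a = p
      · rw [if_pos hap] at hget
        injection hget with hget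
        exact ⟨lu ++ ll ++ [p], by rw [← hget, hm', if_pos rfl],
          hap ▸ (hmem_new p).2 (Or.inr (Or.inr rfl))⟩
      · rw [if_neg hap] at hget
        by_cases hall : a ∈ ll
        · rw [if_pos hall] at hget
          injection hget with hget
          exact ⟨lu ++ ll ++ [p], by rw [← hget, hm', if_pos rfl],
            (hmem_new a).2 (Or.inr (Or.inl hall))⟩
        · rw [if_neg hall] at hget
          rcases hL.1 a lab hget with ⟨l, hlget, hal⟩
          by_cases hlab : lab = u
          · rw [hlab, hu] at hlget
            injection hlget with hlget
            exact ⟨lu ++ ll ++ [p], by rw [hlab, hm', if_pos rfl],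
              (hmem_new a).2 (Or.inl (hlget ▸ hal))⟩
          · by_cases hlab2 : lab = labl
            · rw [hlab2, hl] at hlget
              injection hlget with hlget
              exact absurd (hlget ▸ hal) hall
            · exact ⟨l, by rw [hm', if_neg hlab, if_neg hlab2]; exact hlget, hal⟩
    · intro a ha
      rcases Finset.mem_insert.1 ha with rfl | haP
      · exact ⟨u, by rw [hlab', if_pos rfl]⟩
      · by_cases hap : a = p
        · exact ⟨u, by rw [hlab', if_pos hap]⟩
        · by_cases hall : a ∈ ll
          · exact ⟨u, by rw [hlab', if_neg hap, if_pos hall]⟩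
          · rcases hL.2 a haP with ⟨lab, hlab⟩
            exact ⟨lab, by rw [hlab', if_neg hap, if_neg hall]; exact hlab⟩

-- ---- the single pass of B maintains the partition invariant ----
lemma pvLoopB_spec {grid : List Int} {width height : Int} :
    ∀ (cs done : List (Int × Int)) (label : PySem.Dict (Int × Int) Int)
      (members : PySem.Dict Int (List (Int × Int))) (fresh : Int),
      pvCells height width = done ++ cs →
      pvMembersInv (pvFreeOf grid width done) members →
      pvLabelInv (pvFreeOf grid width done) label members →
      (∀ lab ∈ members.keys, lab < fresh) →
      pvMembersInv (pvFreeSet grid width height)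
        (pvLoopB grid width cs label members fresh).2.1 := by
  intro cs
  induction cs with
  | nil =>
      intro done label members fresh hsplit hM hL hB
      rw [List.append_nil] at hsplit
      show pvMembersInv _ members
      unfold pvFreeSet
      rw [hsplit]
      exact hM
  | cons p rest ih =>
      intro done label members fresh hsplit hM hL hB
      obtain ⟨hpdone, hlex, hcomplete⟩ := pvSplit_facts hsplit
      have hsplit' : pvCells height width = (done ++ [p]) ++ rest := by
        rw [hsplit, List.append_assoc]; rfl
      have hpbox : pvInBox width height p := by
        apply mem_pvCells.1
        rw [hsplit]
        exact List.mem_append_right done List.mem_cons_self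
      cases hbit : pvBitSet grid width p with
      | true =>
          have hstep : pvLoopB grid width (p :: rest) label members fresh =
              pvLoopB grid width rest label members fresh := by
            simp [pvLoopB, hbit]
          rw [hstep]
          have hP' : pvFreeOf grid width (done ++ [p]) = pvFreeOf grid width done :=
            pvFreeOf_append_occ hbit
          exact ih (done ++ [p]) label members fresh hsplit' (hP' ▸ hM) (hP' ▸ hL) hB
      | false =>
          have hpP : p ∉ pvFreeOf grid width done :=
            fun h => hpdone (mem_pvFreeOf.1 h).1
          have hP' : pvFreeOf grid width (done ++ [p]) =
              insert p (pvFreeOf grid width done) := pvFreeOf_append_free hbit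
          have hadjP : ∀ q ∈ pvFreeOf grid width done, pvAdj p q →
              q = (p.1 - 1, p.2) ∨ q = (p.1, p.2 - 1) := by
            intro q hq hadj
            have hlexq := hlex q (mem_pvFreeOf.1 hq).1
            rcases q with ⟨a, b⟩
            unfold pvAdj at hadj
            unfold pvLex at hlexq
            simp only [Prod.ext_iff]
            simp only at hadj hlexq
            omega
          have hadj_up : pvAdj p (p.1 - 1, p.2) := Or.inr ⟨rfl, Or.inl (by omega)⟩
          have hadj_left : pvAdj p (p.1, p.2 - 1) := Or.inl ⟨rfl, Or.inl (by omega)⟩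
          have hfresh_not : members.get? fresh = none := by
            rw [PySem.Dict.get?_eq_none_iff_not_mem_keys]
            intro hmem
            exact absurd (hB fresh hmem) (lt_irrefl fresh)
          rcases hupe : label.get? (p.1 - 1, p.2) with _ | u
          · rcases hlefte : label.get? (p.1, p.2 - 1) with _ | l
            · -- no neighbour: new singleton region
              have hnoup : (p.1 - 1, p.2) ∉ pvFreeOf grid width done := fun hmem => by
                rcases hL.2 _ hmem with ⟨lab, hlab⟩
                rw [hlab] at hupe; cases hupe
              have hnoleft : (p.1, p.2 - 1) ∉ pvFreeOf grid width done := fun hmem => by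
                rcases hL.2 _ hmem with ⟨lab, hlab⟩
                rw [hlefte] at hlab; cases hlab
              have hstep : pvLoopB grid width (p :: rest) label members fresh =
                  pvLoopB grid width rest (label.insert p fresh)
                    ((members.insert fresh []).insert fresh
                      (((members.insert fresh []).getD fresh []) ++ [p])) (fresh + 1) := by
                simp [pvLoopB, hbit, hupe, hlefte]
              rw [hstep]
              have hgetD : (members.insert fresh []).getD fresh [] = [] := by
                unfold PySem.Dict.getD
                rw [PySem.Dict.get?_insert_self]
                rfl
              have hm' : ∀ x, ((members.insert fresh []).insert fresh
                  (((members.insert fresh []).getD fresh []) ++ [p])).get? x =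
                  if x = fresh then some [p] else members.get? x := by
                intro x
                by_cases hx : x = fresh
                · rw [hx, if_pos rfl, PySem.Dict.get?_insert_self, hgetD]
                  rfl
                · rw [if_neg hx, PySem.Dict.get?_insert_of_ne _ _ hx,
                    PySem.Dict.get?_insert_of_ne _ _ hx]
              have hknodup : ((members.insert fresh []).insert fresh
                  (((members.insert fresh []).getD fresh []) ++ [p])).keys.Nodup :=
                pvDict_nodup_keys_insert _ _ _ (pvDict_nodup_keys_insert _ _ _ hM.1)
              have hlab' : ∀ a, (label.insert p fresh).get? a =
                  if a = p then some fresh else label.get? a := by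
                intro a
                by_cases ha : a = p
                · rw [ha, if_pos rfl, PySem.Dict.get?_insert_self]
                · rw [if_neg ha, PySem.Dict.get?_insert_of_ne _ _ ha]
              obtain ⟨hM', hL'⟩ := pvInv_extend_new hpP
                (fun q hq hadj => by
                  rcases hadjP q hq hadj with rfl | rfl
                  · exact hnoup hq
                  · exact hnoleft hq)
                hM hL hfresh_not hm' hknodup hlab'
              refine ih (done ++ [p]) _ _ (fresh + 1) hsplit' (hP' ▸ hM') (hP' ▸ hL') ?_
              intro lab hmem
              have hne : ((members.insert fresh []).insert fresh
                  (((members.insert fresh []).getD fresh []) ++ [p])).get? lab ≠ none :=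
                fun h => (PySem.Dict.get?_eq_none_iff_not_mem_keys _ _).1 h hmem
              rw [hm'] at hne
              by_cases hlab : lab = fresh
              · omega
              · rw [if_neg hlab] at hne
                have : lab ∈ members.keys := by
                  by_contra hmemk
                  exact hne ((PySem.Dict.get?_eq_none_iff_not_mem_keys _ _).2 hmemk)
                have := hB lab this
                omega
            · -- only the left neighbour's region
              rcases hL.1 _ l hlefte with ⟨ll, hll, hleftll⟩
              have hleftP : (p.1, p.2 - 1) ∈ pvFreeOf grid width done :=
                pvMembers_list_subset hM hll _ hleftll
              have hnoup : (p.1 - 1, p.2) ∉ pvFreeOf grid width done := fun hmem => by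
                rcases hL.2 _ hmem with ⟨lab, hlab⟩
                rw [hlab] at hupe; cases hupe
              have hstep : pvLoopB grid width (p :: rest) label members fresh =
                  pvLoopB grid width rest (label.insert p l)
                    (members.insert l ((members.getD l []) ++ [p])) fresh := by
                simp [pvLoopB, hbit, hupe, hlefte]
              rw [hstep]
              have hgetD : members.getD l [] = ll := by
                unfold PySem.Dict.getD
                rw [hll]
                rfl
              have hm' : ∀ x, (members.insert l ((members.getD l []) ++ [p])).get? x =
                  if x = l then some (ll ++ [p]) else members.get? x := by
                intro x
                by_cases hx : x = l
                · rw [hx, if_pos rfl, PySem.Dict.get?_insert_self, hgetD]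
                · rw [if_neg hx, PySem.Dict.get?_insert_of_ne _ _ hx]
              have hknodup : (members.insert l ((members.getD l []) ++ [p])).keys.Nodup :=
                pvDict_nodup_keys_insert _ _ _ hM.1
              have hlab' : ∀ a, (label.insert p l).get? a =
                  if a = p then some l else label.get? a := by
                intro a
                by_cases ha : a = p
                · rw [ha, if_pos rfl, PySem.Dict.get?_insert_self]
                · rw [if_neg ha, PySem.Dict.get?_insert_of_ne _ _ ha]
              obtain ⟨hM', hL'⟩ := pvInv_extend_join hpP hll
                (fun q hq hadj => by
                  rcases hadjP q hq hadj with rfl | rfl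
                  · exact absurd hq hnoup
                  · exact List.mem_toFinset.2 hleftll)
                ⟨_, hleftll, hadj_left⟩ hM hL hm' hknodup hlab'
              refine ih (done ++ [p]) _ _ fresh hsplit' (hP' ▸ hM') (hP' ▸ hL') ?_
              intro lab hmem
              have hne : (members.insert l ((members.getD l []) ++ [p])).get? lab ≠ none :=
                fun h => (PySem.Dict.get?_eq_none_iff_not_mem_keys _ _).1 h hmem
              rw [hm'] at hne
              by_cases hlab : lab = l
              · subst hlab
                exact hB lab (pvDict_mem_keys_of_get?_eq_some hll)
              · rw [if_neg hlab] at hne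
                refine hB lab ?_
                by_contra hmemk
                exact hne ((PySem.Dict.get?_eq_none_iff_not_mem_keys _ _).2 hmemk)
          · rcases hL.1 _ u hupe with ⟨lu, hlu, huplu⟩
            have hupP : (p.1 - 1, p.2) ∈ pvFreeOf grid width done :=
              pvMembers_list_subset hM hlu _ huplu
            rcases hlefte : label.get? (p.1, p.2 - 1) with _ | l
            · -- only the up neighbour's region
              have hnoleft : (p.1, p.2 - 1) ∉ pvFreeOf grid width done := fun hmem => by
                rcases hL.2 _ hmem with ⟨lab, hlab⟩
                rw [hlefte] at hlab; cases hlab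
              have hstep : pvLoopB grid width (p :: rest) label members fresh =
                  pvLoopB grid width rest (label.insert p u)
                    (members.insert u ((members.getD u []) ++ [p])) fresh := by
                simp [pvLoopB, hbit, hupe, hlefte]
              rw [hstep]
              have hgetD : members.getD u [] = lu := by
                unfold PySem.Dict.getD
                rw [hlu]
                rfl
              have hm' : ∀ x, (members.insert u ((members.getD u []) ++ [p])).get? x =
                  if x = u then some (lu ++ [p]) else members.get? x := by
                intro x
                by_cases hx : x = u
                · rw [hx, if_pos rfl, PySem.Dict.get?_insert_self, hgetD]
                · rw [if_neg hx, PySem.Dict.get?_insert_of_ne _ _ hx]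
              have hknodup : (members.insert u ((members.getD u []) ++ [p])).keys.Nodup :=
                pvDict_nodup_keys_insert _ _ _ hM.1
              have hlab' : ∀ a, (label.insert p u).get? a =
                  if a = p then some u else label.get? a := by
                intro a
                by_cases ha : a = p
                · rw [ha, if_pos rfl, PySem.Dict.get?_insert_self]
                · rw [if_neg ha, PySem.Dict.get?_insert_of_ne _ _ ha]
              obtain ⟨hM', hL'⟩ := pvInv_extend_join hpP hlu
                (fun q hq hadj => by
                  rcases hadjP q hq hadj with rfl | rfl
                  · exact List.mem_toFinset.2 huplu
                  · exact absurd hq hnoleft)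
                ⟨_, huplu, hadj_up⟩ hM hL hm' hknodup hlab'
              refine ih (done ++ [p]) _ _ fresh hsplit' (hP' ▸ hM') (hP' ▸ hL') ?_
              intro lab hmem
              have hne : (members.insert u ((members.getD u []) ++ [p])).get? lab ≠ none :=
                fun h => (PySem.Dict.get?_eq_none_iff_not_mem_keys _ _).1 h hmem
              rw [hm'] at hne
              by_cases hlab : lab = u
              · subst hlab
                exact hB lab (pvDict_mem_keys_of_get?_eq_some hlu)
              · rw [if_neg hlab] at hne
                refine hB lab ?_
                by_contra hmemk
                exact hne ((PySem.Dict.get?_eq_none_iff_not_mem_keys _ _).2 hmemk)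
            · rcases hL.1 _ l hlefte with ⟨ll, hll, hleftll⟩
              have hleftP : (p.1, p.2 - 1) ∈ pvFreeOf grid width done :=
                pvMembers_list_subset hM hll _ hleftll
              by_cases hbeq : u = l
              · -- both neighbours already in the same region
                subst hbeq
                rw [hlu] at hll
                injection hll with hll
                subst hll
                have hstep : pvLoopB grid width (p :: rest) label members fresh =
                    pvLoopB grid width rest (label.insert p u)
                      (members.insert u ((members.getD u []) ++ [p])) fresh := by
                  simp [pvLoopB, hbit, hupe, hlefte]
                rw [hstep]
                have hgetD : members.getD u [] = lu := by
                  unfold PySem.Dict.getD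
                  rw [hlu]
                  rfl
                have hm' : ∀ x, (members.insert u ((members.getD u []) ++ [p])).get? x =
                    if x = u then some (lu ++ [p]) else members.get? x := by
                  intro x
                  by_cases hx : x = u
                  · rw [hx, if_pos rfl, PySem.Dict.get?_insert_self, hgetD]
                  · rw [if_neg hx, PySem.Dict.get?_insert_of_ne _ _ hx]
                have hknodup : (members.insert u ((members.getD u []) ++ [p])).keys.Nodup :=
                  pvDict_nodup_keys_insert _ _ _ hM.1
                have hlab' : ∀ a, (label.insert p u).get? a =
                    if a = p then some u else label.get? a := by
                  intro a
                  by_cases ha : a = p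
                  · rw [ha, if_pos rfl, PySem.Dict.get?_insert_self]
                  · rw [if_neg ha, PySem.Dict.get?_insert_of_ne _ _ ha]
                obtain ⟨hM', hL'⟩ := pvInv_extend_join hpP hlu
                  (fun q hq hadj => by
                    rcases hadjP q hq hadj with rfl | rfl
                    · exact List.mem_toFinset.2 huplu
                    · exact List.mem_toFinset.2 hleftll)
                  ⟨_, huplu, hadj_up⟩ hM hL hm' hknodup hlab'
                refine ih (done ++ [p]) _ _ fresh hsplit' (hP' ▸ hM') (hP' ▸ hL') ?_
                intro lab hmem
                have hne : (members.insert u ((members.getD u []) ++ [p])).get? lab ≠ none :=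
                  fun h => (PySem.Dict.get?_eq_none_iff_not_mem_keys _ _).1 h hmem
                rw [hm'] at hne
                by_cases hlab : lab = u
                · subst hlab
                  exact hB lab (pvDict_mem_keys_of_get?_eq_some hlu)
                · rw [if_neg hlab] at hne
                  refine hB lab ?_
                  by_contra hmemk
                  exact hne ((PySem.Dict.get?_eq_none_iff_not_mem_keys _ _).2 hmemk)
              · -- merge the two regions
                have hgetDu : members.getD u [] = lu := by
                  unfold PySem.Dict.getD; rw [hlu]; rfl
                have hgetDl : members.getD l [] = ll := by
                  unfold PySem.Dict.getD; rw [hll]; rfl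
                have hstep : pvLoopB grid width (p :: rest) label members fresh =
                    pvLoopB grid width rest
                      ((ll.foldl (fun d cell => d.insert cell u) label).insert p u)
                      (((members.insert u (lu ++ ll)).erase l).insert u
                        ((((members.insert u (lu ++ ll)).erase l).getD u []) ++ [p]))
                      fresh := by
                  simp only [pvLoopB, hbit, Bool.false_eq_true, if_false, hupe, hlefte,
                    hgetDu, hgetDl]
                  rw [show (u == l) = false from beq_eq_false_iff_ne.2 hbeq]
                  simp only [Bool.false_eq_true, if_false]
                rw [hstep]
                have hm1get : ((members.insert u (lu ++ ll)).erase l).get? u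
                    = some (lu ++ ll) := by
                  rw [pvDict_get?_erase, if_neg hbeq, PySem.Dict.get?_insert_self]
                have hgetD1 : ((members.insert u (lu ++ ll)).erase l).getD u [] = lu ++ ll := by
                  unfold PySem.Dict.getD; rw [hm1get]; rfl
                rw [hgetD1]
                have hm' : ∀ x, (((members.insert u (lu ++ ll)).erase l).insert u
                    (lu ++ ll ++ [p])).get? x =
                    if x = u then some (lu ++ ll ++ [p])
                    else if x = l then none else members.get? x := by
                  intro x
                  by_cases hx : x = u
                  · rw [hx, if_pos rfl, PySem.Dict.get?_insert_self]
                  · rw [if_neg hx, PySem.Dict.get?_insert_of_ne _ _ hx, pvDict_get?_erase]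
                    by_cases hxl : x = l
                    · rw [if_pos hxl, if_pos hxl]
                    · rw [if_neg hxl, if_neg hxl, PySem.Dict.get?_insert_of_ne _ _ hx]
                have hknodup : (((members.insert u (lu ++ ll)).erase l).insert u
                    (lu ++ ll ++ [p])).keys.Nodup :=
                  pvDict_nodup_keys_insert _ _ _
                    (pvDict_nodup_keys_erase _ _ (pvDict_nodup_keys_insert _ _ _ hM.1))
                have hlab' : ∀ a, ((ll.foldl (fun d cell => d.insert cell u) label).insert p u).get? a =
                    if a = p then some u else if a ∈ ll then some u else label.get? a := by
                  intro a
                  by_cases ha : a = p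
                  · rw [ha, if_pos rfl, PySem.Dict.get?_insert_self]
                  · rw [if_neg ha, PySem.Dict.get?_insert_of_ne _ _ ha,
                      pvLabel_foldl_insert_const]
                obtain ⟨hM', hL'⟩ := pvInv_extend_merge hpP hlu hll hbeq
                  (fun q hq hadj => by
                    rcases hadjP q hq hadj with rfl | rfl
                    · exact Finset.mem_union_left _ (List.mem_toFinset.2 huplu)
                    · exact Finset.mem_union_right _ (List.mem_toFinset.2 hleftll))
                  ⟨_, huplu, hadj_up⟩ ⟨_, hleftll, hadj_left⟩ hM hL hm' hknodup hlab'
                refine ih (done ++ [p]) _ _ fresh hsplit' (hP' ▸ hM') (hP' ▸ hL') ?_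
                intro lab hmem
                have hne : ((((members.insert u (lu ++ ll)).erase l).insert u
                    (lu ++ ll ++ [p]))).get? lab ≠ none :=
                  fun h => (PySem.Dict.get?_eq_none_iff_not_mem_keys _ _).1 h hmem
                rw [hm'] at hne
                by_cases hlab : lab = u
                · subst hlab
                  exact hB lab (pvDict_mem_keys_of_get?_eq_some hlu)
                · rw [if_neg hlab] at hne
                  by_cases hlabl : lab = l
                  · rw [if_pos hlabl] at hne
                    exact absurd rfl hne
                  · rw [if_neg hlabl] at hne
                    refine hB lab ?_
                    by_contra hmemk
                    exact hne ((PySem.Dict.get?_eq_none_iff_not_mem_keys _ _).2 hmemk)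

-- ---- summing the region sizes ----
lemma pvCount_union_disjoint {S A B : Finset (Int × Int)} (m : Int) (h : Disjoint A B) :
    pvCount S (A ∪ B) m = pvCount S A m + pvCount S B m := by
  unfold pvCount
  rw [Finset.filter_union, Finset.card_union_of_disjoint (Finset.disjoint_filter_filter h)]

lemma pvCount_comp_list {S : Finset (Int × Int)} {l : List (Int × Int)} (m : Int)
    (hnd : l.Nodup) (hcomp : ∀ a ∈ l, l.toFinset = pvComp S a) :
    (pvCount S l.toFinset m : Int) = if m ≤ (l.length : Int) then (l.length : Int) else 0 := by
  unfold pvCount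
  by_cases hm : m ≤ (l.length : Int)
  · rw [if_pos hm, Finset.filter_true_of_mem, List.toFinset_card_of_nodup hnd]
    intro a ha
    rw [← hcomp a (List.mem_toFinset.1 ha), List.toFinset_card_of_nodup hnd]
    exact hm
  · rw [if_neg hm, Finset.filter_false_of_mem, Finset.card_empty, Nat.cast_zero]
    intro a ha
    rw [← hcomp a (List.mem_toFinset.1 ha), List.toFinset_card_of_nodup hnd]
    exact hm

lemma pvFold_values {S : Finset (Int × Int)} (m : Int) :
    ∀ (vs : List (List (Int × Int))) (U : Finset (Int × Int)) (acc : Int),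
      (∀ l ∈ vs, l.Nodup ∧ ∀ a ∈ l, l.toFinset = pvComp S a) →
      vs.Pairwise (fun l l' => ∀ a ∈ l, a ∉ l') →
      (∀ a, a ∈ U ↔ ∃ l ∈ vs, a ∈ l) →
      vs.foldl (fun acc cells =>
        if m ≤ (cells.length : Int) then acc + (cells.length : Int) else acc) acc
        = acc + (pvCount S U m : Int) := by
  intro vs
  induction vs with
  | nil =>
      intro U acc hvals hpw hcov
      have hU : U = ∅ := Finset.eq_empty_of_forall_notMem (fun a ha => by
        rcases (hcov a).1 ha with ⟨l, hl, _⟩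
        cases hl)
      subst hU
      simp [pvCount]
  | cons l tl ihv =>
      intro U acc hvals hpw hcov
      have hsub : l.toFinset ⊆ U := fun a ha =>
        (hcov a).2 ⟨l, List.mem_cons_self, List.mem_toFinset.1 ha⟩
      have hdis : Disjoint l.toFinset (U \ l.toFinset) := Finset.disjoint_sdiff
      have hU : U = l.toFinset ∪ (U \ l.toFinset) := by
        rw [Finset.union_sdiff_of_subset hsub]
      have hcov' : ∀ a, a ∈ U \ l.toFinset ↔ ∃ l' ∈ tl, a ∈ l' := by
        intro a
        rw [Finset.mem_sdiff]
        constructor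
        · rintro ⟨haU, hal⟩
          rcases (hcov a).1 haU with ⟨l', hl', hal'⟩
          rcases List.mem_cons.1 hl' with rfl | hl'
          · exact absurd (List.mem_toFinset.2 hal') hal
          · exact ⟨l', hl', hal'⟩
        · rintro ⟨l', hl', hal'⟩
          refine ⟨(hcov a).2 ⟨l', List.mem_cons_of_mem _ hl', hal'⟩, ?_⟩
          intro hmem
          exact (List.pairwise_cons.1 hpw).1 l' hl' a (List.mem_toFinset.1 hmem) hal'
      rw [List.foldl_cons, ihv _ _ (fun l' hl' => hvals l' (List.mem_cons_of_mem _ hl'))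
        (List.pairwise_cons.1 hpw).2 hcov']
      have hsplitc : (pvCount S U m : Int) =
          (pvCount S l.toFinset m : Int) + (pvCount S (U \ l.toFinset) m : Int) := by
        conv_lhs => rw [hU]
        rw [pvCount_union_disjoint m hdis]
        push_cast
        ring
      rw [hsplitc]
      obtain ⟨hnd, hcomp⟩ := hvals l List.mem_cons_self
      have hcnt := pvCount_comp_list m hnd hcomp
      push_cast
      by_cases hm : m ≤ (l.length : Int)
      · rw [if_pos hm] at hcnt ⊢
        omega
      · rw [if_neg hm] at hcnt ⊢
        omega

lemma pvMembers_values_sum {S : Finset (Int × Int)}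
    {members : PySem.Dict Int (List (Int × Int))} (hM : pvMembersInv S members) (m : Int) :
    members.values.foldl (fun acc cells =>
      if m ≤ (cells.length : Int) then acc + (cells.length : Int) else acc) 0
      = (pvCount S S m : Int) := by
  have hvals : ∀ l ∈ members.values, l.Nodup ∧ ∀ a ∈ l, l.toFinset = pvComp S a := by
    intro l hl
    rcases List.mem_map.1 hl with ⟨pr, hmem, rfl⟩
    have hget := PySem.Dict.get?_of_mem_items _ hmem hM.1
    exact ⟨(hM.2.1 pr.1 pr.2 hget).2.1, (hM.2.1 pr.1 pr.2 hget).2.2⟩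
  have hitems : members.items.Pairwise (fun x y => x.1 ≠ y.1) := by
    have := hM.1
    unfold PySem.Dict.keys at this
    rw [List.nodup_iff_pairwise_ne] at this
    exact (List.pairwise_map.1 this)
  have hpw : members.values.Pairwise (fun l l' => ∀ a ∈ l, a ∉ l') := by
    unfold PySem.Dict.values
    rw [List.pairwise_map]
    apply List.Pairwise.imp_of_mem ?_ hitems
    intro x y hx hy hne
    exact hM.2.2.2 x.1 y.1 x.2 y.2 hne
      (PySem.Dict.get?_of_mem_items _ hx hM.1) (PySem.Dict.get?_of_mem_items _ hy hM.1)
  have hcov : ∀ a, a ∈ S ↔ ∃ l ∈ members.values, a ∈ l := by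
    intro a
    constructor
    · intro ha
      rcases hM.2.2.1 a ha with ⟨lab, l, hget, hal⟩
      exact ⟨l, List.mem_map.2 ⟨(lab, l), PySem.Dict.mem_items_of_get?_eq_some _ hget, rfl⟩, hal⟩
    · rintro ⟨l, hl, hal⟩
      rcases List.mem_map.1 hl with ⟨pr, hmem, rfl⟩
      have hget := PySem.Dict.get?_of_mem_items _ hmem hM.1
      have := (hM.2.1 pr.1 pr.2 hget).2.2 a hal
      exact pvComp_subset (this ▸ List.mem_toFinset.2 hal)
  rw [pvFold_values m members.values S 0 hvals hpw hcov]
  ring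

-- ---- assembling both ports ----
lemma pvLoopA_full {grid : List Int} {width height required_area min_item_area : Int} :
    pvLoopA height width required_area min_item_area (pvOccupied grid width height)
      (pvCells height width) PySem.Set.empty 0 =
    decide (required_area ≤
      (pvCount (pvFreeSet grid width height) (pvFreeSet grid width height)
        min_item_area : Int)) := by
  apply pvLoopA_spec (pvCells height width) PySem.Set.empty 0 ∅
  · rfl
  · exact Finset.empty_subset _
  · intro x hx
    exact absurd hx (Finset.notMem_empty x)
  · intro q hq _
    exact mem_pvCells.2 (mem_pvFreeSet.1 hq).1
  · intro q hq
    exact mem_pvCells.1 hq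
  · simp [pvCount]

lemma pvLoopB_full {grid : List Int} {width height : Int} :
    pvMembersInv (pvFreeSet grid width height)
      (pvLoopB grid width (pvCells height width) PySem.Dict.empty PySem.Dict.empty 0).2.1 := by
  apply pvLoopB_spec (pvCells height width) [] PySem.Dict.empty PySem.Dict.empty 0
  · rfl
  · refine ⟨by simp [PySem.Dict.keys, PySem.Dict.empty], ?_, ?_, ?_⟩
    · intro lab l h
      rw [PySem.Dict.get?_empty] at h
      cases h
    · intro a ha
      simp [pvFreeOf] at ha
    · intro lab lab' l l' hne h1 h2
      rw [PySem.Dict.get?_empty] at h1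
      cases h1
  · constructor
    · intro a lab h
      rw [PySem.Dict.get?_empty] at h
      cases h
    · intro a ha
      simp [pvFreeOf] at ha
  · intro lab hmem
    simp [PySem.Dict.keys, PySem.Dict.empty] at hmem

-- ===== VERDICT (by name: the statement is the Claim_ definition above) =====
theorem is_space_sufficient_spec : Claim_equal_is_space_sufficient := by
  unfold Claim_equal_is_space_sufficient
  intro grid width height required_area min_item_area slack _ _
  unfold Spec_is_space_sufficient
  simp only [is_space_sufficient, is_space_sufficient_alt]
  by_cases h1 : width * height - pvUsed grid < required_area
  · rw [if_pos h1, if_pos h1]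
  · rw [if_neg h1, if_neg h1]
    by_cases h2 : required_area + slack < width * height - pvUsed grid
    · rw [if_pos h2, if_pos h2]
    · rw [if_neg h2, if_neg h2]
      rw [pvLoopA_full, pvMembers_values_sum pvLoopB_full min_item_area]
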